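-- pv_equiv track=rewrite | github.com/Ag3497120/verantyx-v6 | arc/world_commands.py | recolor_each_obj_by_size
-- ===== SOURCE A (Python) =====
-- from collections import Counter, defaultdict
--
-- def _bg(g):
--     c = Counter()
--     for row in g: c.update(row)
--     return c.most_common(1)[0][0]
--
-- def _copy(g):
--     return [row[:] for row in g]
--
-- def _objects(g, bg, conn=4):
--     h, w = len(g), len(g[0])
--     vis = [[False]*w for _ in range(h)]
--     objs = []
--     ds = [(-1,0),(1,0),(0,-1),(0,1)]
--     if conn == 8: ds += [(-1,-1),(-1,1),(1,-1),(1,1)]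
--     for r in range(h):
--         for c in range(w):
--             if not vis[r][c] and g[r][c] != bg:
--                 obj = []; stk = [(r,c)]; vis[r][c] = True
--                 while stk:
--                     cr, cc = stk.pop()
--                     obj.append((cr,cc,g[cr][cc]))
--                     for dr,dc in ds:
--                         nr,nc = cr+dr, cc+dc
--                         if 0<=nr<h and 0<=nc<w and not vis[nr][nc] and g[nr][nc] != bg:
--                             vis[nr][nc] = True; stk.append((nr,nc))
--                 objs.append(obj)
--     return objs
--
-- def recolor_each_obj_by_size(g):
--     """各オブジェクトをサイズ順に色1,2,3...で塗り直す"""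
--     bg=_bg(g); objs=_objects(g,bg)
--     objs.sort(key=len); res=_copy(g)
--     for i, obj in enumerate(objs):
--         col = (i % 9) + 1
--         if col == bg: col = (col % 9) + 1
--         for r,c,_ in obj: res[r][c]=col
--     return res
-- ===== SOURCE B (Python) =====
-- def recolor_each_obj_by_size(g):
--     """各オブジェクトをサイズ順に色1,2,3...で塗り直す"""
--     # background = most frequent value (first-seen wins ties, as Counter does)
--     counts = {}
--     for row in g:
--         for v in row:
--             counts[v] = counts.get(v, 0) + 1
--     bg = max(counts, key=lambda k: counts[k])
--     h, w = len(g), len(g[0])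
--     # single-pass connected-component labeling (union of label-equivalence
--     # classes with eager relabeling) -- no flood fill / worklist at all
--     label = {}
--     for r in range(h):
--         for c in range(w):
--             if g[r][c] == bg:
--                 continue
--             label[(r, c)] = (r, c)
--             for nr, nc in ((r - 1, c), (r, c - 1)):
--                 if 0 <= nr and 0 <= nc and g[nr][nc] != bg:
--                     a, b = label[(r, c)], label[(nr, nc)]
--                     if a != b:
--                         label = {k: (b if v == a else v) for k, v in label.items()}
--     # group cells by label; dict insertion order = order of each component's
--     # row-major-first cell, which is exactly A's discovery order
--     groups = {}
--     for r in range(h):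
--         for c in range(w):
--             if g[r][c] != bg:
--                 groups.setdefault(label[(r, c)], []).append((r, c))
--     comps = list(groups.values())
--     # recolor by size rank (stable sort keeps first-cell order on ties)
--     color = {}
--     for i, comp in enumerate(sorted(comps, key=len)):
--         col = i % 9 + 1
--         if col == bg:
--             col = col % 9 + 1
--         for cell in comp:
--             color[cell] = col
--     return [[color.get((r, c), v) for c, v in enumerate(row)] for r, row in enumerate(g)]
-- ===== Notes on version B (the rewrite author's own statement) =====
-- stated objective: alternative
-- what changed: Replaces A's per-object DFS flood fill (explicit stack + boolean visited matrix, recoloring a copied grid in place) by a single row-major pass of connected-component labeling: each non-background cell is merged with its upper/left neighbours through a label-equivalence dict with eager relabeling (union-find with depth-0 forests), components are then read off by grouping cells by final label, and the output grid is rebuilt from a cell->color dict.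
import Mathlib
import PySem

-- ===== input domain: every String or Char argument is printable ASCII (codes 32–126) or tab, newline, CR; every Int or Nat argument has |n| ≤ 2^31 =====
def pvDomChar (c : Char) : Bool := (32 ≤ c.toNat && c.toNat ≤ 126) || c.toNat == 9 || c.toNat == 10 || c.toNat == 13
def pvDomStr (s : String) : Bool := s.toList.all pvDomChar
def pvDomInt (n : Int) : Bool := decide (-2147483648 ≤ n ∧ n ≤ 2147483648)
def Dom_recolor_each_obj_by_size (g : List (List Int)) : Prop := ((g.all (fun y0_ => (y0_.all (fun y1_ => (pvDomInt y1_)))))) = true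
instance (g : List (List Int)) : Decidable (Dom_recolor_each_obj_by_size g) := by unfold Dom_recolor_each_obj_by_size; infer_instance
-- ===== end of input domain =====

-- A = per-object DFS flood fill (explicit stack, visited matrix, in-place recoloring of a copy);
-- B = single-pass connected-component labeling (merge with up/left neighbours through a
-- label-equivalence dict with eager relabeling), grouping by final label, dict-based repaint.


-- shared 2-d access primitives (grid[r][c] and grid[r][c] = v, nonnegative indices at every use site)
def pvGet2 {α : Type} (m : List (List α)) (r c : Int) : Option α :=
  (PySem.List.pyGet? m r).bind (fun row => PySem.List.pyGet? row c)

def pvSet2 {α : Type} (m : List (List α)) (r c : Int) (v : α) : List (List α) :=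
  match PySem.List.pyGet? m r with
  | some row => m.set r.toNat (row.set c.toNat v)
  | none => m

-- ===== PORT A =====
-- _bg: Counter updated row by row, then most_common(1)[0][0]
def pvA_counter (g : List (List Int)) : PySem.Dict Int Int :=
  g.foldl (fun d row => row.foldl (fun d x => d.modify x 0 (· + 1)) d) PySem.Dict.empty

def pvA_bg? (g : List (List Int)) : Option Int :=
  (PySem.List.pyGet? (PySem.List.sorted (pvA_counter g).items (fun p => p.2) true) 0).map (fun p => p.1)

-- _objects is called with conn=4, so ds is the four axis directions
def pvA_ds : List (Int × Int) := [(-1, 0), (1, 0), (0, -1), (0, 1)]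

-- body of "for dr,dc in ds: ..." (vis, stk) update
def pvA_push (g : List (List Int)) (bg h w : Int) (cr cc : Int)
    (st : List (List Bool) × List (Int × Int)) (d : Int × Int) :
    List (List Bool) × List (Int × Int) :=
  let nr := cr + d.1
  let nc := cc + d.2
  if 0 ≤ nr ∧ nr < h ∧ 0 ≤ nc ∧ nc < w then
    match pvGet2 st.1 nr nc with
    | some false =>
      match pvGet2 g nr nc with
      | some x => if x ≠ bg then (pvSet2 st.1 nr nc true, st.2 ++ [(nr, nc)]) else st
      | none => st
    | _ => st
  else st

def pvOffCount (vis : List (List Bool)) : Nat := (vis.map (fun row => row.count false)).sum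

lemma pvCount_set_true (row : List Bool) (n : Nat) (h : row[n]? = some false) :
    (row.set n true).count false + 1 = row.count false := by
  induction row generalizing n with
  | nil => simp at h
  | cons b t ih =>
    cases n with
    | zero =>
      simp at h
      simp [h, List.count_cons]
    | succ n =>
      simp at h
      have := ih n h
      cases b <;> simp [List.count_cons, this] <;> omega

lemma pvOffCount_set_true (m : List (List Bool)) (r c : Int) (hr : 0 ≤ r) (hc : 0 ≤ c)
    (hget : pvGet2 m r c = some false) :
    pvOffCount (pvSet2 m r c true) + 1 = pvOffCount m := by
  unfold pvGet2 at hget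
  obtain ⟨row, hrow, hcell⟩ := Option.bind_eq_some_iff.mp hget
  rw [PySem.List.pyGet?_of_nonneg _ hr] at hrow
  rw [PySem.List.pyGet?_of_nonneg _ hc] at hcell
  have hlt : r.toNat < m.length := (List.getElem?_eq_some_iff.mp hrow).1
  unfold pvSet2
  rw [PySem.List.pyGet?_of_nonneg _ hr, hrow]
  unfold pvOffCount
  rw [List.map_set, List.sum_set]
  have hdec := pvCount_set_true row c.toNat hcell
  have hmlen : r.toNat < (m.map (fun row => row.count false)).length := by simpa using hlt
  have hsplit : (m.map (fun row => row.count false)).sum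
      = ((m.map (fun row => row.count false)).take r.toNat).sum
        + (row.count false)
        + ((m.map (fun row => row.count false)).drop (r.toNat+1)).sum := by
    conv_lhs => rw [← List.take_append_drop r.toNat (m.map (fun row => row.count false))]
    rw [← List.getElem_cons_drop hmlen]
    have : (m.map (fun row => row.count false))[r.toNat] = row.count false := by
      obtain ⟨h1, h2⟩ := List.getElem?_eq_some_iff.mp hrow
      simp [h2]
    rw [this]
    simp [List.sum_append]
    omega
  rw [if_pos hmlen]
  omega

lemma pvA_push_measure (g : List (List Int)) (bg h w cr cc : Int)
    (st : List (List Bool) × List (Int × Int)) (d : Int × Int) :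
    pvOffCount (pvA_push g bg h w cr cc st d).1 + (pvA_push g bg h w cr cc st d).2.length
      = pvOffCount st.1 + st.2.length := by
  unfold pvA_push
  dsimp only
  split_ifs with hin
  · cases hv : pvGet2 st.1 (cr + d.1) (cc + d.2) with
    | none => simp
    | some b =>
      cases b with
      | true => simp
      | false =>
        cases hg : pvGet2 g (cr + d.1) (cc + d.2) with
        | none => simp
        | some x =>
          by_cases hx : x ≠ bg
          · simp only [if_pos hx]
            have := pvOffCount_set_true st.1 (cr + d.1) (cc + d.2) (by omega) (by omega) hv
            simp [List.length_append]
            omega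
          · simp [hx]
  · simp

lemma pvA_fold_measure (g : List (List Int)) (bg h w cr cc : Int) (ds : List (Int × Int))
    (st : List (List Bool) × List (Int × Int)) :
    pvOffCount (ds.foldl (pvA_push g bg h w cr cc) st).1
      + (ds.foldl (pvA_push g bg h w cr cc) st).2.length
      = pvOffCount st.1 + st.2.length := by
  induction ds generalizing st with
  | nil => rfl
  | cons d ds ih =>
    have h2 := pvA_push_measure g bg h w cr cc st d
    have h3 := ih (pvA_push g bg h w cr cc st d)
    simp only [List.foldl_cons]
    omega

-- the "while stk:" loop of _objects
def pvA_dfs (g : List (List Int)) (bg h w : Int) (vis : List (List Bool))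
    (stk : List (Int × Int)) (obj : List (Int × Int × Int)) :
    List (List Bool) × List (Int × Int × Int) :=
  match stk with
  | [] => (vis, obj)
  | y :: ys =>
    let p := ((y :: ys).getLast?).getD (0, 0)
    let stk1 := (y :: ys).dropLast
    let obj1 := obj ++ [(p.1, p.2, (pvGet2 g p.1 p.2).getD 0)]
    let st := pvA_ds.foldl (pvA_push g bg h w p.1 p.2) (vis, stk1)
    pvA_dfs g bg h w st.1 st.2 obj1
termination_by pvOffCount vis + stk.length
decreasing_by
  have h1 := pvA_fold_measure g bg h w (((y :: ys).getLast?).getD (0, 0)).1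
    (((y :: ys).getLast?).getD (0, 0)).2 pvA_ds (vis, (y :: ys).dropLast)
  have h2 : (y :: ys).dropLast.length + 1 = (y :: ys).length := by simp
  simp only at h1 ⊢
  omega

-- the row/column scan of _objects
def pvA_scan (g : List (List Int)) (bg h w : Int) (vis0 : List (List Bool)) :
    List (List Bool) × List (List (Int × Int × Int)) :=
  (PySem.List.pyRange 0 h 1).foldl (fun s r =>
    (PySem.List.pyRange 0 w 1).foldl (fun s c =>
      match pvGet2 s.1 r c with
      | some false =>
        match pvGet2 g r c with
        | some x =>
          if x ≠ bg then
            let st := pvA_dfs g bg h w (pvSet2 s.1 r c true) [(r, c)] []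
            (st.1, s.2 ++ [st.2])
          else s
        | none => s
      | _ => s) s) (vis0, [])

def pvA_colOf (i : Nat) (bg : Int) : Int :=
  let col := PySem.Int.mod (i : Int) 9 + 1
  if col = bg then PySem.Int.mod col 9 + 1 else col

def recolor_each_obj_by_size (g : List (List Int)) : List (List Int) :=
  match pvA_bg? g with
  | none => []        -- Python: IndexError (grid without cells); outside Pre_
  | some bg =>
    match PySem.List.pyGet? g 0 with
    | none => []      -- Python: IndexError on g[0]; outside Pre_
    | some row0 =>
      let h := (g.length : Int)
      let w := (row0.length : Int)
      let vis0 := List.replicate g.length (List.replicate row0.length false)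
      let objs := (pvA_scan g bg h w vis0).2
      let sobjs := PySem.List.sorted objs (fun o => o.length) false
      let res0 := g.map (fun row => PySem.List.slice row none none)
      sobjs.zipIdx.foldl (fun res oi =>
        oi.1.foldl (fun res t => pvSet2 res t.1 t.2.1 (pvA_colOf oi.2 bg)) res) res0

-- ===== PORT B =====
-- counts dict + max(counts, key=lambda k: counts[k])
def pvB_counts (g : List (List Int)) : PySem.Dict Int Int :=
  g.foldl (fun d row => row.foldl (fun d v => d.insert v (d.getD v 0 + 1)) d) PySem.Dict.empty

def pvB_bg? (g : List (List Int)) : Option Int :=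
  PySem.List.max? (pvB_counts g).keys (fun k => (pvB_counts g).getD k 0)

-- the two already-scanned neighbours (up, left) of (r, c)
def pvB_nbrs2 (r c : Int) : List (Int × Int) := [(r - 1, c), (r, c - 1)]

-- label = {k: (b if v == a else v) for k, v in label.items()}
def pvRelabel (d : PySem.Dict (Int × Int) (Int × Int)) (a b : Int × Int) :
    PySem.Dict (Int × Int) (Int × Int) :=
  d.items.foldl (fun d' kv => d'.insert kv.1 (if kv.2 = a then b else kv.2)) PySem.Dict.empty

-- body of "for nr, nc in ((r-1,c),(r,c-1)): ..."
def pvB_edgeStep (g : List (List Int)) (bg : Int) (p : Int × Int)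
    (label : PySem.Dict (Int × Int) (Int × Int)) (n : Int × Int) :
    PySem.Dict (Int × Int) (Int × Int) :=
  if 0 ≤ n.1 ∧ 0 ≤ n.2 then
    match pvGet2 g n.1 n.2 with
    | some x =>
      if x ≠ bg then
        match label.get? p, label.get? n with
        | some a, some b => if a ≠ b then pvRelabel label a b else label
        | _, _ => label   -- unreachable: both keys are always present in the Python dict
      else label
    | none => label       -- Python: IndexError on a short row; outside Pre_
  else label

-- body of the phase-1 double loop over cells
def pvB_cellStep (g : List (List Int)) (bg : Int)
    (label : PySem.Dict (Int × Int) (Int × Int)) (p : Int × Int) :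
    PySem.Dict (Int × Int) (Int × Int) :=
  match pvGet2 g p.1 p.2 with
  | some x =>
    if x = bg then label
    else (pvB_nbrs2 p.1 p.2).foldl (pvB_edgeStep g bg p) (label.insert p p)
  | none => label         -- Python: IndexError on a short row; outside Pre_

def pvB_label (g : List (List Int)) (bg h w : Int) :
    PySem.Dict (Int × Int) (Int × Int) :=
  (PySem.List.pyRange 0 h 1).foldl (fun lab r =>
    (PySem.List.pyRange 0 w 1).foldl (fun lab c => pvB_cellStep g bg lab (r, c)) lab)
    PySem.Dict.empty

-- phase 2: groups.setdefault(label[(r,c)], []).append((r,c))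
def pvB_groups (g : List (List Int)) (bg h w : Int)
    (label : PySem.Dict (Int × Int) (Int × Int)) :
    PySem.Dict (Int × Int) (List (Int × Int)) :=
  (PySem.List.pyRange 0 h 1).foldl (fun d r =>
    (PySem.List.pyRange 0 w 1).foldl (fun d c =>
      match pvGet2 g r c with
      | some x =>
        if x ≠ bg then
          d.modify (label.getD (r, c) (r, c)) [] (· ++ [(r, c)])  -- key (r,c) always present
        else d
      | none => d) d) PySem.Dict.empty

def pvB_colOf (i : Nat) (bg : Int) : Int :=
  let col := PySem.Int.mod (i : Int) 9 + 1
  if col = bg then PySem.Int.mod col 9 + 1 else col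

def recolor_each_obj_by_size_alt (g : List (List Int)) : List (List Int) :=
  match pvB_bg? g with
  | none => []        -- Python: max() on an empty dict raises ValueError; outside Pre_
  | some bg =>
    match PySem.List.pyGet? g 0 with
    | none => []      -- Python: IndexError on g[0]; outside Pre_
    | some row0 =>
      let h := (g.length : Int)
      let w := (row0.length : Int)
      let label := pvB_label g bg h w
      let comps := (pvB_groups g bg h w label).values
      let order := PySem.List.sorted comps (fun c => c.length) false
      let color := order.zipIdx.foldl (fun d ci =>
        ci.1.foldl (fun d cell => d.insert cell (pvB_colOf ci.2 bg)) d) PySem.Dict.empty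
      g.zipIdx.map (fun rowr =>
        rowr.1.zipIdx.map (fun vc => color.getD ((rowr.2 : Int), (vc.2 : Int)) vc.1))

-- ===== PRECONDITION & SPEC =====
-- Pre_ excludes exactly the inputs where the Python A raises IndexError: grids with no cells at
-- all (_bg on an empty Counter) and grids whose later rows are shorter than row 0 (g[r][c] scan).
def Pre_recolor_each_obj_by_size (g : List (List Int)) : Prop :=
  (∃ row ∈ g, row ≠ []) ∧ ∀ row ∈ g, g.headI.length ≤ row.length
instance (g : List (List Int)) : Decidable (Pre_recolor_each_obj_by_size g) := by
  unfold Pre_recolor_each_obj_by_size; infer_instance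

def pvWitness_recolor_each_obj_by_size : List (List Int) := [[1, 0], [0, 1]]

def Spec_recolor_each_obj_by_size (g : List (List Int)) (out : List (List Int)) : Prop :=
  out = recolor_each_obj_by_size_alt g
instance (g : List (List Int)) (out : List (List Int)) :
    Decidable (Spec_recolor_each_obj_by_size g out) := by
  unfold Spec_recolor_each_obj_by_size; infer_instance

-- ===== CLAIM (what is proved, stated in full; the proofs are below) =====
def Claim_equal_recolor_each_obj_by_size : Prop :=
  ∀ (g : List (List Int)), Dom_recolor_each_obj_by_size g →
    Pre_recolor_each_obj_by_size g →
    Spec_recolor_each_obj_by_size g (recolor_each_obj_by_size g)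

-- ===== LEMMAS AND PROOFS =====

def pvOkC (g : List (List Int)) (bg h w : Int) (p : Int × Int) : Prop :=
  0 ≤ p.1 ∧ p.1 < h ∧ 0 ≤ p.2 ∧ p.2 < w ∧ ∃ v, pvGet2 g p.1 p.2 = some v ∧ v ≠ bg

def pvAdj (g : List (List Int)) (bg h w : Int) (p q : Int × Int) : Prop :=
  pvOkC g bg h w p ∧ pvOkC g bg h w q ∧
    (q = (p.1 - 1, p.2) ∨ q = (p.1 + 1, p.2) ∨ q = (p.1, p.2 - 1) ∨ q = (p.1, p.2 + 1))

def pvComp (g : List (List Int)) (bg h w : Int) (s x : Int × Int) : Prop :=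
  Relation.ReflTransGen (pvAdj g bg h w) s x

lemma pvAdj_symm {g : List (List Int)} {bg h w : Int} {p q : Int × Int}
    (hpq : pvAdj g bg h w p q) : pvAdj g bg h w q p := by
  obtain ⟨hp, hq, hd⟩ := hpq
  refine ⟨hq, hp, ?_⟩
  obtain ⟨a, b⟩ := p; obtain ⟨x, y⟩ := q
  rcases hd with h | h | h | h <;> simp only [Prod.mk.injEq] at h ⊢ <;> omega

lemma pvAdj_irrefl {g : List (List Int)} {bg h w : Int} {p : Int × Int}
    (hadj : pvAdj g bg h w p p) : False := by
  obtain ⟨-, -, hd⟩ := hadj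
  obtain ⟨a, b⟩ := p
  rcases hd with h' | h' | h' | h' <;> simp only [Prod.mk.injEq] at h' <;> omega

lemma pvComp_ok {g : List (List Int)} {bg h w : Int} {s x : Int × Int}
    (hs : pvOkC g bg h w s) (hc : pvComp g bg h w s x) : pvOkC g bg h w x := by
  induction hc with
  | refl => exact hs
  | tail _ hadj ih => exact hadj.2.1

lemma pvComp_tail {g : List (List Int)} {bg h w : Int} {s p q : Int × Int}
    (hc : pvComp g bg h w s p) (hadj : pvAdj g bg h w p q) : pvComp g bg h w s q :=
  Relation.ReflTransGen.tail hc hadj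

def pvVisT (vis : List (List Bool)) (p : Int × Int) : Prop :=
  0 ≤ p.1 ∧ 0 ≤ p.2 ∧ pvGet2 vis p.1 p.2 = some true

def pvDims (vis : List (List Bool)) (h w : Int) : Prop :=
  0 ≤ h ∧ 0 ≤ w ∧ vis.length = h.toNat ∧ ∀ row ∈ vis, row.length = w.toNat

lemma pvGet2_some_of_dims {vis : List (List Bool)} {h w : Int} (hd : pvDims vis h w)
    {p : Int × Int} (hp : 0 ≤ p.1 ∧ p.1 < h ∧ 0 ≤ p.2 ∧ p.2 < w) :
    ∃ b, pvGet2 vis p.1 p.2 = some b := by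
  obtain ⟨hh, hw, hlen, hrows⟩ := hd
  obtain ⟨h1, h2, h3, h4⟩ := hp
  have hr : p.1.toNat < vis.length := by omega
  unfold pvGet2
  rw [PySem.List.pyGet?_of_nonneg _ h1, List.getElem?_eq_getElem hr]
  have hrow := hrows _ (List.getElem_mem hr)
  have hc : p.2.toNat < vis[p.1.toNat].length := by omega
  simp only [Option.bind_some]
  rw [PySem.List.pyGet?_of_nonneg _ h3]
  exact ⟨_, List.getElem?_eq_getElem hc⟩

lemma pvSet2_dims {vis : List (List Bool)} {h w : Int} (hd : pvDims vis h w)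
    (r c : Int) (v : Bool) : pvDims (pvSet2 vis r c v) h w := by
  obtain ⟨hh, hw, hlen, hrows⟩ := hd
  unfold pvSet2
  cases hrow : PySem.List.pyGet? vis r with
  | none => exact ⟨hh, hw, hlen, hrows⟩
  | some row =>
    refine ⟨hh, hw, by simpa using hlen, ?_⟩
    intro row' hrow'
    rcases List.mem_or_eq_of_mem_set hrow' with hmem | heq
    · exact hrows _ hmem
    · subst heq
      rw [List.length_set]
      exact hrows _ (PySem.List.mem_of_pyGet?_eq_some _ hrow)

lemma pvGet2_pvSet2 {α : Type} {m : List (List α)} {r c : Int} {b₀ : α}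
    (hget : pvGet2 m r c = some b₀) (hr : 0 ≤ r) (hc : 0 ≤ c) (v : α)
    {x y : Int} (hx : 0 ≤ x) (hy : 0 ≤ y) :
    pvGet2 (pvSet2 m r c v) x y = if x = r ∧ y = c then some v else pvGet2 m x y := by
  unfold pvGet2 at hget ⊢
  obtain ⟨row, hrow, hcell⟩ := Option.bind_eq_some_iff.mp hget
  rw [PySem.List.pyGet?_of_nonneg _ hr] at hrow
  rw [PySem.List.pyGet?_of_nonneg _ hc] at hcell
  have hrlt : r.toNat < m.length := (List.getElem?_eq_some_iff.mp hrow).1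
  have hclt : c.toNat < row.length := (List.getElem?_eq_some_iff.mp hcell).1
  obtain ⟨hrlt', hrowv⟩ := List.getElem?_eq_some_iff.mp hrow
  unfold pvSet2
  rw [PySem.List.pyGet?_of_nonneg _ hr, hrow]
  rw [PySem.List.pyGet?_of_nonneg _ hx]
  rw [List.getElem?_set]
  by_cases hxr : x = r
  · subst hxr
    rw [if_pos (by omega), if_pos hrlt]
    simp only [Option.bind_some]
    rw [PySem.List.pyGet?_of_nonneg _ hy, List.getElem?_set]
    by_cases hyc : y = c
    · subst hyc
      rw [if_pos (by omega), if_pos hclt, if_pos (by simp)]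
    · rw [if_neg (by omega), if_neg (by tauto)]
      rw [PySem.List.pyGet?_of_nonneg _ hx, hrow]
      simp only [Option.bind_some]
      rw [PySem.List.pyGet?_of_nonneg _ hy]
  · rw [if_neg (by omega), if_neg (by tauto)]
    rw [PySem.List.pyGet?_of_nonneg _ hx]

lemma pvVisT_set {m : List (List Bool)} {r c : Int} {b₀ : Bool}
    (hget : pvGet2 m r c = some b₀) (hr : 0 ≤ r) (hc : 0 ≤ c) (p : Int × Int) :
    pvVisT (pvSet2 m r c true) p ↔ p = (r, c) ∨ pvVisT m p := by
  by_cases hp : 0 ≤ p.1 ∧ 0 ≤ p.2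
  · unfold pvVisT
    rw [pvGet2_pvSet2 hget hr hc true hp.1 hp.2]
    by_cases hpe : p = (r, c)
    · subst hpe
      simp [hp.1, hp.2]
    · have : ¬ (p.1 = r ∧ p.2 = c) := by
        intro hand
        exact hpe (Prod.ext hand.1 hand.2)
      rw [if_neg this]
      simp [hpe]
  · constructor
    · intro hv; exact absurd ⟨hv.1, hv.2.1⟩ hp
    · rintro (hpe | hv)
      · subst hpe; exact absurd ⟨hr, hc⟩ hp
      · exact absurd ⟨hv.1, hv.2.1⟩ hp

-- one pvA_push step, fully characterized
lemma pvA_push_spec (g : List (List Int)) (bg h w cr cc : Int)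
    (st : List (List Bool) × List (Int × Int)) (d : Int × Int)
    (hd : pvDims st.1 h w) :
    pvDims (pvA_push g bg h w cr cc st d).1 h w ∧
    ((pvA_push g bg h w cr cc st d = st ∧
        (pvOkC g bg h w (cr + d.1, cc + d.2) → pvVisT st.1 (cr + d.1, cc + d.2))) ∨
      (¬ pvVisT st.1 (cr + d.1, cc + d.2) ∧ pvOkC g bg h w (cr + d.1, cc + d.2) ∧
        (pvA_push g bg h w cr cc st d).1 = pvSet2 st.1 (cr + d.1) (cc + d.2) true ∧
        (pvA_push g bg h w cr cc st d).2 = st.2 ++ [(cr + d.1, cc + d.2)])) := by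
  unfold pvA_push
  dsimp only
  split_ifs with hin
  · obtain ⟨b, hb⟩ := pvGet2_some_of_dims hd (p := (cr + d.1, cc + d.2)) (by tauto)
    rw [hb]
    cases b with
    | true =>
      refine ⟨hd, Or.inl ⟨rfl, fun _ => ⟨by omega, by omega, hb⟩⟩⟩
    | false =>
      cases hg : pvGet2 g (cr + d.1) (cc + d.2) with
      | none =>
        refine ⟨hd, Or.inl ⟨rfl, fun hok => ?_⟩⟩
        exact absurd hg (by obtain ⟨-, -, -, -, v, hv, -⟩ := hok; simp [hv])
      | some x =>
        dsimp only
        by_cases hx : x ≠ bg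
        · rw [if_pos hx]
          refine ⟨pvSet2_dims hd _ _ _, Or.inr ⟨?_, ?_, rfl, rfl⟩⟩
          · intro hv
            rw [hv.2.2] at hb; simp at hb
          · exact ⟨by omega, by omega, by omega, by omega, x, hg, hx⟩
        · rw [if_neg hx]
          refine ⟨hd, Or.inl ⟨rfl, fun hok => ?_⟩⟩
          obtain ⟨-, -, -, -, v, hv, hvne⟩ := hok
          rw [hg] at hv
          exact absurd (Option.some.inj hv ▸ hvne) (by simpa using hx)
  · refine ⟨hd, Or.inl ⟨rfl, fun hok => ?_⟩⟩
    obtain ⟨h1, h2, h3, h4, -⟩ := hok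
    exact absurd ⟨h1, h2, h3, h4⟩ hin

-- the four-direction fold, fully characterized
lemma pvA_pushes_spec (g : List (List Int)) (bg h w cr cc : Int) (ds : List (Int × Int))
    (st : List (List Bool) × List (Int × Int)) (hd : pvDims st.1 h w) :
    ∃ as : List (Int × Int),
      pvDims (ds.foldl (pvA_push g bg h w cr cc) st).1 h w ∧
      (ds.foldl (pvA_push g bg h w cr cc) st).2 = st.2 ++ as ∧
      (∀ p, pvVisT (ds.foldl (pvA_push g bg h w cr cc) st).1 p ↔ pvVisT st.1 p ∨ p ∈ as) ∧
      as.Nodup ∧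
      (∀ a ∈ as, ¬ pvVisT st.1 a ∧ pvOkC g bg h w a ∧ ∃ d ∈ ds, a = (cr + d.1, cc + d.2)) ∧
      (∀ d ∈ ds, pvOkC g bg h w (cr + d.1, cc + d.2) →
        pvVisT (ds.foldl (pvA_push g bg h w cr cc) st).1 (cr + d.1, cc + d.2)) := by
  induction ds generalizing st with
  | nil =>
    exact ⟨[], hd, by simp, by simp, List.nodup_nil, by simp, by simp⟩
  | cons d ds ih =>
    obtain ⟨hd', hcase⟩ := pvA_push_spec g bg h w cr cc st d hd
    obtain ⟨as1, ih1, ih2, ih3, ih4, ih5, ih6⟩ := ih (pvA_push g bg h w cr cc st d) hd'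
    rcases hcase with ⟨heq, himp⟩ | ⟨hfresh, hok, hv1, hs1⟩
    · rw [heq] at ih1 ih2 ih3 ih5 ih6
      refine ⟨as1, by rw [List.foldl_cons, heq]; exact ih1, by rw [List.foldl_cons, heq]; exact ih2, ?_, ih4, ?_, ?_⟩
      · intro p; rw [List.foldl_cons, heq]; exact ih3 p
      · intro a ha
        obtain ⟨hf, hok, d', hd', he⟩ := ih5 a ha
        exact ⟨hf, hok, d', List.mem_cons_of_mem _ hd', he⟩
      · intro d' hd' hok
        rcases List.mem_cons.mp hd' with rfl | hmem
        · rw [List.foldl_cons, heq, ih3]; exact Or.inl (himp hok)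
        · rw [List.foldl_cons, heq]; exact ih6 d' hmem hok
    · -- pushed: n = (cr+d.1, cc+d.2) is fresh
      set n := (cr + d.1, cc + d.2) with hn
      obtain ⟨b₀, hb₀⟩ : ∃ b, pvGet2 st.1 n.1 n.2 = some b :=
        pvGet2_some_of_dims hd (by obtain ⟨a1,a2,a3,a4,-⟩ := hok; exact ⟨a1,a2,a3,a4⟩)
      have hsetiff : ∀ p, pvVisT (pvA_push g bg h w cr cc st d).1 p ↔ p = n ∨ pvVisT st.1 p := by
        intro p
        rw [hv1]
        exact pvVisT_set hb₀ hok.1 hok.2.2.1 p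
      have hnin1 : n ∉ as1 := by
        intro hmem
        exact (ih5 n hmem).1 ((hsetiff n).mpr (Or.inl rfl))
      refine ⟨n :: as1, ih1, ?_, ?_, ?_, ?_, ?_⟩
      · rw [List.foldl_cons, ih2, hs1]; simp
      · intro p
        rw [List.foldl_cons, ih3, hsetiff p]
        simp only [List.mem_cons]
        tauto
      · exact List.nodup_cons.mpr ⟨hnin1, ih4⟩
      · intro a ha
        rcases List.mem_cons.mp ha with rfl | hmem
        · exact ⟨hfresh, hok, d, List.mem_cons_self .., rfl⟩
        · obtain ⟨hf, hok', d', hd', he⟩ := ih5 a hmem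
          refine ⟨fun hv => hf ((hsetiff a).mpr (Or.inr hv)), hok', d', List.mem_cons_of_mem _ hd', he⟩
      · intro d' hd' hok'
        rcases List.mem_cons.mp hd' with rfl | hmem
        · rw [List.foldl_cons, ih3]
          exact Or.inl ((hsetiff _).mpr (Or.inl rfl))
        · exact ih6 d' hmem hok'

def pvProj (obj : List (Int × Int × Int)) : List (Int × Int) :=
  obj.map (fun t => (t.1, t.2.1))

lemma pvAdj_of_ds {g : List (List Int)} {bg h w : Int} {p a : Int × Int} {d : Int × Int}
    (hp : pvOkC g bg h w p) (ha : pvOkC g bg h w a) (hd : d ∈ pvA_ds)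
    (he : a = (p.1 + d.1, p.2 + d.2)) : pvAdj g bg h w p a := by
  refine ⟨hp, ha, ?_⟩
  simp only [pvA_ds, List.mem_cons, List.not_mem_nil, or_false] at hd
  rcases hd with rfl | rfl | rfl | rfl <;> subst he <;> simp <;> omega

lemma pvAdj_mem_ds {g : List (List Int)} {bg h w : Int} {p q : Int × Int}
    (hadj : pvAdj g bg h w p q) : ∃ d ∈ pvA_ds, q = (p.1 + d.1, p.2 + d.2) := by
  obtain ⟨-, -, hd⟩ := hadj
  rcases hd with rfl | rfl | rfl | rfl
  · exact ⟨(-1, 0), by simp [pvA_ds], by simp; omega⟩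
  · exact ⟨(1, 0), by simp [pvA_ds], by simp⟩
  · exact ⟨(0, -1), by simp [pvA_ds], by simp; omega⟩
  · exact ⟨(0, 1), by simp [pvA_ds], by simp⟩

theorem pvA_dfs_main (g : List (List Int)) (bg h w : Int) (V0 : Int × Int → Prop)
    (seed : Int × Int)
    (hcl : ∀ p, V0 p → ∀ q, pvAdj g bg h w p q → V0 q)
    (hokseed : pvOkC g bg h w seed) :
    ∀ vis stk obj, pvDims vis h w →
      (∀ p, pvVisT vis p ↔ V0 p ∨ p ∈ pvProj obj ++ stk) →
      (pvProj obj ++ stk).Nodup →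
      (∀ p ∈ pvProj obj ++ stk, ¬ V0 p) →
      (∀ p ∈ pvProj obj ++ stk, pvComp g bg h w seed p) →
      (∀ p ∈ pvProj obj, ∀ q, pvAdj g bg h w p q → pvVisT vis q) →
      (seed ∈ pvProj obj ++ stk) →
      pvDims (pvA_dfs g bg h w vis stk obj).1 h w ∧
      (∀ p, pvVisT (pvA_dfs g bg h w vis stk obj).1 p ↔
        V0 p ∨ p ∈ pvProj (pvA_dfs g bg h w vis stk obj).2) ∧
      (pvProj (pvA_dfs g bg h w vis stk obj).2).Nodup ∧
      (∀ p ∈ pvProj (pvA_dfs g bg h w vis stk obj).2, ¬ V0 p ∧ pvComp g bg h w seed p) ∧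
      (∀ p ∈ pvProj (pvA_dfs g bg h w vis stk obj).2, ∀ q, pvAdj g bg h w p q →
        V0 q ∨ q ∈ pvProj (pvA_dfs g bg h w vis stk obj).2) ∧
      (∀ p ∈ pvProj obj ++ stk, p ∈ pvProj (pvA_dfs g bg h w vis stk obj).2) := by
  intro vis stk obj
  induction vis, stk, obj using pvA_dfs.induct g bg h w with
  | case1 vis obj =>
    intro hd hvis hnd hfresh hcur hproc hseedin
    rw [pvA_dfs]
    refine ⟨hd, ?_, ?_, ?_, ?_, ?_⟩
    · simpa using hvis
    · simpa using hnd
    · intro p hp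
      exact ⟨hfresh p (by simpa using hp), hcur p (by simpa using hp)⟩
    · intro p hp q hadj
      have := hproc p (by simpa using hp) q hadj
      rw [hvis q] at this
      simpa using this
    · intro p hp; simpa using hp
  | case2 vis ob z zs p stk1 obj1 st ih =>
    intro hd hvis hnd hfresh hcur hproc hseedin
    have hne : (z :: zs) ≠ [] := List.cons_ne_nil _ _
    have hp' : p = (z :: zs).getLast hne := by
      show ((z :: zs).getLast?.getD (0, 0)) = _
      rw [List.getLast?_eq_some_getLast hne]
      rfl
    have hps : stk1 ++ [p] = z :: zs := by
      show (z :: zs).dropLast ++ [p] = z :: zs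
      rw [hp']
      exact List.dropLast_append_getLast hne
    have hpmem : p ∈ pvProj ob ++ z :: zs := by
      rw [← hps]; simp
    have hokp : pvOkC g bg h w p := pvComp_ok hokseed (hcur p hpmem)
    obtain ⟨as, h1, h2, h3, h4, h5, h6⟩ :=
      pvA_pushes_spec g bg h w p.1 p.2 pvA_ds (vis, stk1) hd
    have hproj1 : pvProj obj1 = pvProj ob ++ [p] := by
      show pvProj (ob ++ [(p.1, p.2, (pvGet2 g p.1 p.2).getD 0)]) = _
      simp [pvProj]
    have hst2 : st.2 = stk1 ++ as := h2
    have hmem' : ∀ x, x ∈ pvProj obj1 ++ st.2 ↔ (x ∈ pvProj ob ++ z :: zs) ∨ x ∈ as := by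
      intro x
      rw [hproj1, hst2, ← hps]
      simp only [List.mem_append, List.mem_singleton]
      tauto
    have hasfresh : ∀ a ∈ as, ¬ V0 a ∧ a ∉ pvProj ob ++ z :: zs := by
      intro a ha
      have hnv := (h5 a ha).1
      rw [hvis a] at hnv
      push Not at hnv
      exact hnv
    have hnd0 : (pvProj ob ++ (stk1 ++ [p])).Nodup := by
      rw [hps]; exact hnd
    have hperm : ((pvProj ob ++ (stk1 ++ [p])) ++ as).Perm ((pvProj ob ++ [p]) ++ (stk1 ++ as)) := by
      have base : ((stk1 ++ [p]) ++ as).Perm (([p] ++ stk1) ++ as) :=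
        (List.perm_append_comm).append_right as
      have mid := base.append_left (pvProj ob)
      simpa [List.append_assoc] using mid
    have hndnew : (pvProj obj1 ++ st.2).Nodup := by
      rw [hproj1, hst2]
      refine hperm.nodup (List.Nodup.append hnd0 h4 ?_)
      intro a ha has
      exact (hasfresh a has).2 (by rw [← hps]; exact ha)
    have hvis' : ∀ x, pvVisT st.1 x ↔ V0 x ∨ x ∈ pvProj obj1 ++ st.2 := by
      intro x
      rw [h3 x, hvis x, hmem' x]
      tauto
    have hfresh' : ∀ x ∈ pvProj obj1 ++ st.2, ¬ V0 x := by
      intro x hx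
      rcases (hmem' x).mp hx with hold | has
      · exact hfresh x hold
      · exact (hasfresh x has).1
    have hcur' : ∀ x ∈ pvProj obj1 ++ st.2, pvComp g bg h w seed x := by
      intro x hx
      rcases (hmem' x).mp hx with hold | has
      · exact hcur x hold
      · obtain ⟨-, hok, d, hdmem, he⟩ := h5 x has
        exact pvComp_tail (hcur p hpmem) (pvAdj_of_ds hokp hok hdmem he)
    have hproc' : ∀ x ∈ pvProj obj1, ∀ q, pvAdj g bg h w x q → pvVisT st.1 q := by
      intro x hx q hadj
      rw [hproj1, List.mem_append, List.mem_singleton] at hx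
      rcases hx with hx | rfl
      · rw [h3 q]; exact Or.inl (hproc x hx q hadj)
      · obtain ⟨d, hdmem, he⟩ := pvAdj_mem_ds hadj
        have := h6 d hdmem (he ▸ hadj.2.1)
        rwa [← he] at this
    have hseed' : seed ∈ pvProj obj1 ++ st.2 := (hmem' seed).mpr (Or.inl hseedin)
    obtain ⟨c1, c2, c3, c4, c5, c6⟩ := ih h1 hvis' hndnew hfresh' hcur' hproc' hseed'
    rw [pvA_dfs]
    refine ⟨c1, c2, c3, c4, c5, ?_⟩
    intro x hx
    exact c6 x ((hmem' x).mpr (Or.inl hx))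

lemma pvCells_eq_comp (g : List (List Int)) (bg h w : Int) (V0 : Int × Int → Prop)
    (seed : Int × Int) (C : List (Int × Int))
    (hcl : ∀ p, V0 p → ∀ q, pvAdj g bg h w p q → V0 q)
    (hseedC : seed ∈ C)
    (hsub : ∀ x ∈ C, ¬ V0 x ∧ pvComp g bg h w seed x)
    (hclosed : ∀ x ∈ C, ∀ q, pvAdj g bg h w x q → V0 q ∨ q ∈ C) :
    ∀ x, x ∈ C ↔ pvComp g bg h w seed x := by
  intro x
  constructor
  · exact fun hx => (hsub x hx).2
  · intro hcomp
    induction hcomp with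
    | refl => exact hseedC
    | @tail b c hb hadj ihb =>
      rcases hclosed b ihb c hadj with hV | hC
      · exact absurd (hcl c hV b (pvAdj_symm hadj)) (hsub b ihb).1
      · exact hC

lemma pvForall₂_append_one {α β : Type} {R : α → β → Prop} {l₁ : List α} {l₂ : List β}
    {a : α} {b : β} (h : List.Forall₂ R l₁ l₂) (hab : R a b) :
    List.Forall₂ R (l₁ ++ [a]) (l₂ ++ [b]) := by
  induction h with
  | nil => simpa using hab
  | cons hx hxs ih => exact List.Forall₂.cons hx ih

lemma pvFoldl_foldl_product {σ : Type} (f : σ → Int × Int → σ) (l₁ l₂ : List Int) (init : σ) :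
    l₁.foldl (fun s r => l₂.foldl (fun s c => f s (r, c)) s) init
      = (l₁ ×ˢ l₂).foldl f init := by
  induction l₁ generalizing init with
  | nil => simp
  | cons a l₁ ih =>
    rw [List.foldl_cons, List.product_cons, List.foldl_append, List.foldl_map]
    exact ih _

def pvB_cells (h w : Int) : List (Int × Int) :=
  (PySem.List.pyRange 0 h 1) ×ˢ (PySem.List.pyRange 0 w 1)

-- the per-cell body of A's scan
def pvA_cellstep (g : List (List Int)) (bg h w : Int)
    (s : List (List Bool) × List (List (Int × Int × Int))) (p : Int × Int) :
    List (List Bool) × List (List (Int × Int × Int)) :=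
  match pvGet2 s.1 p.1 p.2 with
  | some false =>
    match pvGet2 g p.1 p.2 with
    | some x =>
      if x ≠ bg then
        let st := pvA_dfs g bg h w (pvSet2 s.1 p.1 p.2 true) [(p.1, p.2)] []
        (st.1, s.2 ++ [st.2])
      else s
    | none => s
  | _ => s

lemma pvA_scan_eq_foldl (g : List (List Int)) (bg h w : Int) (vis0 : List (List Bool)) :
    pvA_scan g bg h w vis0 = (pvB_cells h w).foldl (pvA_cellstep g bg h w) (vis0, []) := by
  show (PySem.List.pyRange 0 h 1).foldl
      (fun s r => (PySem.List.pyRange 0 w 1).foldl (fun s c => pvA_cellstep g bg h w s (r, c)) s)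
      (vis0, []) = _
  exact pvFoldl_foldl_product (pvA_cellstep g bg h w) _ _ _

-- the coupling relation between one A-object and one B-component
def pvR (g : List (List Int)) (bg h w : Int) (o : List (Int × Int × Int))
    (c : List (Int × Int)) : Prop :=
  (pvProj o).Nodup ∧ c.Nodup ∧ (∀ x, x ∈ pvProj o ↔ x ∈ c) ∧ ∀ x ∈ c, pvOkC g bg h w x

-- ===== cell bookkeeping: Boolean ok-test, cells of the grid =====
def pvOkb (g : List (List Int)) (bg : Int) (p : Int × Int) : Bool :=
  match pvGet2 g p.1 p.2 with
  | some x => x != bg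
  | none => false

lemma pvMem_cells {h w : Int} {p : Int × Int} :
    p ∈ pvB_cells h w ↔ 0 ≤ p.1 ∧ p.1 < h ∧ 0 ≤ p.2 ∧ p.2 < w := by
  obtain ⟨a, b⟩ := p
  show (a, b) ∈ List.product _ _ ↔ _
  rw [List.pair_mem_product, PySem.List.mem_pyRange_one, PySem.List.mem_pyRange_one]
  tauto

lemma pvOkC_iff_mem_filter {g : List (List Int)} {bg h w : Int} {p : Int × Int} :
    pvOkC g bg h w p ↔ p ∈ (pvB_cells h w).filter (pvOkb g bg) := by
  rw [List.mem_filter, pvMem_cells]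
  unfold pvOkC pvOkb
  constructor
  · rintro ⟨a1, a2, a3, a4, v, hv, hne⟩
    refine ⟨⟨a1, a2, a3, a4⟩, ?_⟩
    rw [hv]
    simpa using hne
  · rintro ⟨⟨a1, a2, a3, a4⟩, hok⟩
    cases hg : pvGet2 g p.1 p.2 with
    | none => rw [hg] at hok; simp at hok
    | some x =>
      rw [hg] at hok
      exact ⟨a1, a2, a3, a4, x, rfl, by simpa using hok⟩

def pvCellLt (a b : Int × Int) : Prop := a.1 < b.1 ∨ (a.1 = b.1 ∧ a.2 < b.2)

lemma pvCells_nodup (h w : Int) : (pvB_cells h w).Nodup :=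
  List.Nodup.product (PySem.List.nodup_pyRange_one 0 h) (PySem.List.nodup_pyRange_one 0 w)

lemma pvPairwise_product (l1 l2 : List Int) (h1 : l1.Pairwise (· < ·))
    (h2 : l2.Pairwise (· < ·)) : (l1 ×ˢ l2).Pairwise pvCellLt := by
  induction l1 with
  | nil => simp
  | cons a l1 ih =>
    rw [List.product_cons]
    rw [List.pairwise_append]
    refine ⟨?_, ih (List.Pairwise.of_cons h1), ?_⟩
    · rw [List.pairwise_map]
      exact h2.imp (fun hlt => Or.inr ⟨rfl, hlt⟩)
    · intro u hu v hv
      obtain ⟨b, hb, rfl⟩ := List.mem_map.mp hu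
      obtain ⟨v1, v2⟩ := v
      have hv1 : v1 ∈ l1 := (List.pair_mem_product.mp hv).1
      exact Or.inl ((List.pairwise_cons.mp h1).1 v1 hv1)

lemma pvCells_pairwise (h w : Int) : (pvB_cells h w).Pairwise pvCellLt :=
  pvPairwise_product _ _ (PySem.List.pairwise_lt_pyRange_one 0 h)
    (PySem.List.pairwise_lt_pyRange_one 0 w)

-- ===== the connectivity relation restricted to an already-scanned cell set =====
def pvConnOn (g : List (List Int)) (bg h w : Int) (P : List (Int × Int))
    (x y : Int × Int) : Prop :=
  Relation.ReflTransGen (fun a b => pvAdj g bg h w a b ∧ a ∈ P ∧ b ∈ P) x y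

lemma pvConnOn_mono {g : List (List Int)} {bg h w : Int} {P Q : List (Int × Int)}
    (hPQ : ∀ z ∈ P, z ∈ Q) {x y : Int × Int} (hc : pvConnOn g bg h w P x y) :
    pvConnOn g bg h w Q x y := by
  induction hc with
  | refl => exact Relation.ReflTransGen.refl
  | tail _ hs ih => exact Relation.ReflTransGen.tail ih ⟨hs.1, hPQ _ hs.2.1, hPQ _ hs.2.2⟩

lemma pvConnOn_symm {g : List (List Int)} {bg h w : Int} {P : List (Int × Int)}
    {x y : Int × Int} (hc : pvConnOn g bg h w P x y) : pvConnOn g bg h w P y x := by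
  induction hc with
  | refl => exact Relation.ReflTransGen.refl
  | tail _ hs ih =>
    exact Relation.ReflTransGen.trans
      (Relation.ReflTransGen.single ⟨pvAdj_symm hs.1, hs.2.2, hs.2.1⟩) ih

lemma pvConnOn_trans {g : List (List Int)} {bg h w : Int} {P : List (Int × Int)}
    {x y z : Int × Int} (h1 : pvConnOn g bg h w P x y) (h2 : pvConnOn g bg h w P y z) :
    pvConnOn g bg h w P x z := Relation.ReflTransGen.trans h1 h2

lemma pvConnOn_ends {g : List (List Int)} {bg h w : Int} {P : List (Int × Int)}
    {x y : Int × Int} (hc : pvConnOn g bg h w P x y) :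
    x = y ∨ ((x ∈ P ∧ pvOkC g bg h w x) ∧ (y ∈ P ∧ pvOkC g bg h w y)) := by
  induction hc with
  | refl => exact Or.inl rfl
  | @tail b c _ hs ih =>
    refine Or.inr ⟨?_, hs.2.2, hs.1.2.1⟩
    rcases ih with rfl | hx
    · exact ⟨hs.2.1, hs.1.1⟩
    · exact hx.1

lemma pvConnOn_notmem_right {g : List (List Int)} {bg h w : Int} {P : List (Int × Int)}
    {p x : Int × Int} (hp : p ∉ P) : pvConnOn g bg h w P x p ↔ x = p := by
  constructor
  · intro hc
    rcases pvConnOn_ends hc with rfl | ⟨-, hmem, -⟩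
    · rfl
    · exact absurd hmem hp
  · rintro rfl; exact Relation.ReflTransGen.refl

-- appending a non-object cell changes nothing
lemma pvConnOn_snoc_notok {g : List (List Int)} {bg h w : Int} {P : List (Int × Int)}
    {p : Int × Int} (hnot : ¬ pvOkC g bg h w p) {x y : Int × Int} :
    pvConnOn g bg h w (P ++ [p]) x y ↔ pvConnOn g bg h w P x y := by
  constructor
  · intro hc
    induction hc with
    | refl => exact Relation.ReflTransGen.refl
    | @tail b c _ hs ih =>
      have hb : b ∈ P := by
        rcases List.mem_append.mp hs.2.1 with hb | hb
        · exact hb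
        · exact absurd (List.mem_singleton.mp hb ▸ hs.1.1) hnot
      have hcm : c ∈ P := by
        rcases List.mem_append.mp hs.2.2 with hcm | hcm
        · exact hcm
        · exact absurd (List.mem_singleton.mp hcm ▸ hs.1.2.1) hnot
      exact Relation.ReflTransGen.tail ih ⟨hs.1, hb, hcm⟩
  · exact pvConnOn_mono (fun z hz => List.mem_append_left _ hz)

-- the class of p when p is appended: p itself plus everything connected (within P) to a
-- P-neighbour of p
def pvCls (g : List (List Int)) (bg h w : Int) (P : List (Int × Int)) (p z : Int × Int) : Prop :=
  z = p ∨ ∃ n, pvAdj g bg h w p n ∧ n ∈ P ∧ pvConnOn g bg h w P z n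

lemma pvCls_to_connOn {g : List (List Int)} {bg h w : Int} {P : List (Int × Int)}
    {p z : Int × Int} (hok : pvOkC g bg h w p) (hcl : pvCls g bg h w P p z) :
    pvConnOn g bg h w (P ++ [p]) z p := by
  rcases hcl with rfl | ⟨n, hadj, hnP, hc⟩
  · exact Relation.ReflTransGen.refl
  · refine Relation.ReflTransGen.tail
      (pvConnOn_mono (fun t ht => List.mem_append_left _ ht) hc)
      ⟨pvAdj_symm hadj, List.mem_append_left _ hnP, List.mem_append_right _ (by simp)⟩

theorem pvConnOn_snoc {g : List (List Int)} {bg h w : Int} {P : List (Int × Int)}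
    {p : Int × Int} (hpP : p ∉ P) (hok : pvOkC g bg h w p) (x y : Int × Int) :
    pvConnOn g bg h w (P ++ [p]) x y ↔
      pvConnOn g bg h w P x y ∨ (pvCls g bg h w P p x ∧ pvCls g bg h w P p y) := by
  constructor
  · intro hc
    induction hc with
    | refl => exact Or.inl Relation.ReflTransGen.refl
    | @tail b c _ hs ih =>
      by_cases hcp : c = p
      · subst hcp
        have hb : b ∈ P := by
          rcases List.mem_append.mp hs.2.1 with hb | hb
          · exact hb
          · exact absurd (List.mem_singleton.mp hb) (by rintro rfl; exact pvAdj_irrefl hs.1)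
        have hclb : pvCls g bg h w P c b := Or.inr ⟨b, pvAdj_symm hs.1, hb, Relation.ReflTransGen.refl⟩
        have hclx : pvCls g bg h w P c x := by
          rcases ih with hxy | ⟨hclx, -⟩
          · rcases pvConnOn_ends hxy with rfl | _
            · exact hclb
            · exact Or.inr ⟨b, pvAdj_symm hs.1, hb, hxy⟩
          · exact hclx
        exact Or.inr ⟨hclx, Or.inl rfl⟩
      · have hcm : c ∈ P := by
          rcases List.mem_append.mp hs.2.2 with hcm | hcm
          · exact hcm
          · exact absurd (List.mem_singleton.mp hcm) hcp
        by_cases hbp : b = p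
        · subst hbp
          -- edge p→c: so c is a P-neighbour of p
          have hclc : pvCls g bg h w P b c := Or.inr ⟨c, hs.1, hcm, Relation.ReflTransGen.refl⟩
          have hclx : pvCls g bg h w P b x := by
            rcases ih with hxp | ⟨hclx, -⟩
            · rcases pvConnOn_ends hxp with rfl | ⟨-, hmem, -⟩
              · exact Or.inl rfl
              · exact absurd hmem hpP
            · exact hclx
          exact Or.inr ⟨hclx, hclc⟩
        · have hb : b ∈ P := by
            rcases List.mem_append.mp hs.2.1 with hb | hb
            · exact hb
            · exact absurd (List.mem_singleton.mp hb) hbp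
          rcases ih with hxb | ⟨hclx, hclb⟩
          · exact Or.inl (Relation.ReflTransGen.tail hxb ⟨hs.1, hb, hcm⟩)
          · refine Or.inr ⟨hclx, ?_⟩
            rcases hclb with rfl | ⟨n, hadj, hnP, hcn⟩
            · exact absurd rfl hbp
            · exact Or.inr ⟨n, hadj, hnP, pvConnOn_trans
                (Relation.ReflTransGen.single ⟨pvAdj_symm hs.1, hcm, hb⟩) hcn⟩
  · rintro (hc | ⟨hx, hy⟩)
    · exact pvConnOn_mono (fun z hz => List.mem_append_left _ hz) hc
    · exact pvConnOn_trans (pvCls_to_connOn hok hx) (pvConnOn_symm (pvCls_to_connOn hok hy))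

-- ===== label-dict semantics =====
def pvLab (label : PySem.Dict (Int × Int) (Int × Int)) (S : Int × Int → Prop)
    (R : Int × Int → Int × Int → Prop) : Prop :=
  label.keys.Nodup ∧
  (∀ x, (label.get? x).isSome = true ↔ S x) ∧
  (∀ x y, S x → S y → (label.get? x = label.get? y ↔ R x y)) ∧
  (∀ x v, label.get? x = some v → S v)

lemma pvLab_congr {label : PySem.Dict (Int × Int) (Int × Int)}
    {S S' : Int × Int → Prop} {R R' : Int × Int → Int × Int → Prop}
    (h : pvLab label S R) (hS : ∀ x, S x ↔ S' x) (hR : ∀ x y, S x → S y → (R x y ↔ R' x y)) :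
    pvLab label S' R' := by
  obtain ⟨h0, h1, h2, h3⟩ := h
  refine ⟨h0, fun x => (h1 x).trans (hS x), fun x y hx hy => ?_, fun x v hv => (hS _).mp (h3 x v hv)⟩
  rw [h2 x y ((hS x).mpr hx) ((hS y).mpr hy), hR x y ((hS x).mpr hx) ((hS y).mpr hy)]

def pvJoin (R : Int × Int → Int × Int → Prop) (u v : Int × Int)
    (x y : Int × Int) : Prop :=
  R x y ∨ (R x u ∧ R y v) ∨ (R x v ∧ R y u)

lemma pvRelabel_items (d : PySem.Dict (Int × Int) (Int × Int)) (a b : Int × Int)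
    (hnd : d.keys.Nodup) :
    (pvRelabel d a b).items = d.items.map (fun kv => (kv.1, if kv.2 = a then b else kv.2)) := by
  unfold pvRelabel
  rw [PySem.Dict.items_foldl_insert_fresh (k := Prod.fst)
    (v := fun kv => if kv.2 = a then b else kv.2)]
  · rfl
  · intro q hq; exact PySem.Dict.contains_empty _
  · simpa [PySem.Dict.keys] using hnd

lemma pvRelabel_keys (d : PySem.Dict (Int × Int) (Int × Int)) (a b : Int × Int)
    (hnd : d.keys.Nodup) : (pvRelabel d a b).keys = d.keys := by
  show (pvRelabel d a b).items.map (·.1) = d.items.map (·.1)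
  rw [pvRelabel_items d a b hnd, List.map_map]
  rfl

lemma pvRelabel_get? (d : PySem.Dict (Int × Int) (Int × Int)) (a b : Int × Int)
    (hnd : d.keys.Nodup) (x : Int × Int) :
    (pvRelabel d a b).get? x = (d.get? x).map (fun v => if v = a then b else v) := by
  have hknd : (pvRelabel d a b).keys.Nodup := by
    rw [pvRelabel_keys d a b hnd]; exact hnd
  cases hx : d.get? x with
  | none =>
    rw [PySem.Dict.get?_eq_none_iff_not_mem_keys] at hx
    have : (pvRelabel d a b).get? x = none := by
      rw [PySem.Dict.get?_eq_none_iff_not_mem_keys, pvRelabel_keys d a b hnd]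
      exact hx
    rw [this]
    rfl
  | some v =>
    have hmem : (x, v) ∈ d.items := PySem.Dict.mem_items_of_get?_eq_some d hx
    have hmem2 : (x, if v = a then b else v) ∈ (pvRelabel d a b).items := by
      rw [pvRelabel_items d a b hnd]
      exact List.mem_map.mpr ⟨(x, v), hmem, rfl⟩
    rw [PySem.Dict.get?_of_mem_items _ hmem2 hknd]
    rfl

lemma pvLab_insert {label : PySem.Dict (Int × Int) (Int × Int)}
    {S : Int × Int → Prop} {R : Int × Int → Int × Int → Prop}
    (h : pvLab label S R) (hR : ∀ x y, R x y → x = y ∨ (S x ∧ S y))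
    {p : Int × Int} (hp : ¬ S p) :
    pvLab (label.insert p p) (fun x => S x ∨ x = p)
      (fun x y => R x y ∨ (x = p ∧ y = p)) := by
  obtain ⟨h0, h1, h2, h3⟩ := h
  have hget : ∀ x, (label.insert p p).get? x = if x = p then some p else label.get? x :=
    fun x => PySem.Dict.get?_insert (k' := x) label p p
  refine ⟨PySem.Dict.nodup_keys_insert label p p h0, ?_, ?_, ?_⟩
  · intro x
    rw [hget x]
    by_cases hxp : x = p
    · simp [hxp]
    · rw [if_neg hxp, h1 x]
      simp [hxp]
  · intro x y hx hy
    rw [hget x, hget y]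
    by_cases hxp : x = p <;> by_cases hyp : y = p
    · rw [if_pos hxp, if_pos hyp]
      exact iff_of_true rfl (Or.inr ⟨hxp, hyp⟩)
    · rw [if_pos hxp, if_neg hyp]
      have hSy : S y := hy.resolve_right hyp
      obtain ⟨vy, hvy⟩ := Option.isSome_iff_exists.mp ((h1 y).mpr hSy)
      rw [hvy]
      constructor
      · intro he
        obtain rfl : p = vy := Option.some.inj he
        exact absurd (h3 y p hvy) hp
      · rintro (hr | ⟨-, hyp2⟩)
        · rcases hR _ _ hr with heq | ⟨hSx, -⟩
          · exact absurd (by rw [← heq]; exact hxp) hyp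
          · exact absurd (hxp ▸ hSx) hp
        · exact absurd hyp2 hyp
    · rw [if_neg hxp, if_pos hyp]
      have hSx : S x := hx.resolve_right hxp
      obtain ⟨vx, hvx⟩ := Option.isSome_iff_exists.mp ((h1 x).mpr hSx)
      rw [hvx]
      constructor
      · intro he
        have hvp : vx = p := Option.some.inj he
        rw [hvp] at hvx
        exact absurd (h3 x p hvx) hp
      · rintro (hr | ⟨hxp2, -⟩)
        · rcases hR _ _ hr with heq | ⟨-, hSy⟩
          · exact absurd (by rw [heq]; exact hyp) hxp
          · exact absurd (hyp ▸ hSy) hp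
        · exact absurd hxp2 hxp
    · rw [if_neg hxp, if_neg hyp,
        h2 x y (hx.resolve_right hxp) (hy.resolve_right hyp)]
      constructor
      · exact Or.inl
      · rintro (hr | ⟨hxp2, -⟩)
        · exact hr
        · exact absurd hxp2 hxp
  · intro x v hv
    rw [hget x] at hv
    by_cases hxp : x = p
    · rw [if_pos hxp] at hv
      exact Or.inr (Option.some.inj hv).symm
    · rw [if_neg hxp] at hv
      exact Or.inl (h3 x v hv)

-- the effect of one edge step of B on the label semantics
lemma pvSwap_eq {vx vy a b : Int × Int} (hab : a ≠ b) :
    ((if vx = a then b else vx) = (if vy = a then b else vy))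
      ↔ (vx = vy ∨ (vx = a ∧ vy = b) ∨ (vx = b ∧ vy = a)) := by
  by_cases h1 : vx = a <;> by_cases h2 : vy = a
  · rw [if_pos h1, if_pos h2]
    exact iff_of_true rfl (Or.inl (h1.trans h2.symm))
  · rw [if_pos h1, if_neg h2]
    constructor
    · intro he; exact Or.inr (Or.inl ⟨h1, he.symm⟩)
    · rintro (he | ⟨-, he⟩ | ⟨-, he⟩)
      · exact absurd (by rw [← he]; exact h1) h2
      · exact he.symm
      · exact absurd he h2
  · rw [if_neg h1, if_pos h2]
    constructor
    · intro he; exact Or.inr (Or.inr ⟨he, h2⟩)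
    · rintro (he | ⟨he, -⟩ | ⟨he, -⟩)
      · exact absurd (by rw [he]; exact h2) h1
      · exact absurd he h1
      · exact he
  · rw [if_neg h1, if_neg h2]
    constructor
    · exact Or.inl
    · rintro (he | ⟨he, -⟩ | ⟨-, he⟩)
      · exact he
      · exact absurd he h1
      · exact absurd he h2

lemma pvLab_edge {label : PySem.Dict (Int × Int) (Int × Int)} {S : Int × Int → Prop}
    {R : Int × Int → Int × Int → Prop} (h : pvLab label S R)
    {p n : Int × Int} (hSp : S p) (hSn : S n) :
    pvLab (match label.get? p, label.get? n with
           | some a, some b => if a ≠ b then pvRelabel label a b else label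
           | _, _ => label) S (pvJoin R p n) := by
  obtain ⟨h0, h1, h2, h3⟩ := h
  obtain ⟨a, ha⟩ := Option.isSome_iff_exists.mp ((h1 p).mpr hSp)
  obtain ⟨b, hb⟩ := Option.isSome_iff_exists.mp ((h1 n).mpr hSn)
  rw [ha, hb]
  show pvLab (if a ≠ b then pvRelabel label a b else label) S (pvJoin R p n)
  by_cases hab : a = b
  · -- labels already agree: the join collapses
    subst hab
    rw [if_neg (by simp)]
    have hRpn : R p n := (h2 p n hSp hSn).mp (ha.trans hb.symm)
    refine ⟨h0, h1, ?_, h3⟩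
    intro x y hx hy
    rw [h2 x y hx hy]
    constructor
    · exact fun hr => Or.inl hr
    · rintro (hr | ⟨hxp, hyn⟩ | ⟨hxn, hyp⟩)
      · exact hr
      · have e1 : label.get? x = label.get? p := (h2 x p hx hSp).mpr hxp
        have e2 : label.get? y = label.get? n := (h2 y n hy hSn).mpr hyn
        exact (h2 x y hx hy).mp (by rw [e1, e2, ha, hb])
      · have e1 : label.get? x = label.get? n := (h2 x n hx hSn).mpr hxn
        have e2 : label.get? y = label.get? p := (h2 y p hy hSp).mpr hyp
        exact (h2 x y hx hy).mp (by rw [e1, e2, ha, hb])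
  · rw [if_pos (by simpa using hab)]
    have hget := pvRelabel_get? label a b h0
    refine ⟨?_, ?_, ?_, ?_⟩
    · rw [PySem.Dict.keys] at h0 ⊢
      rw [pvRelabel_items label a b h0, List.map_map]
      exact h0
    · intro x
      rw [hget x, ← h1 x]
      cases label.get? x <;> simp
    · intro x y hx hy
      obtain ⟨vx, hvx⟩ := Option.isSome_iff_exists.mp ((h1 x).mpr hx)
      obtain ⟨vy, hvy⟩ := Option.isSome_iff_exists.mp ((h1 y).mpr hy)
      rw [hget x, hget y, hvx, hvy]
      simp only [Option.map_some, Option.some.injEq]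
      rw [pvSwap_eq hab]
      have exy : vx = vy ↔ R x y := by
        rw [← h2 x y hx hy, hvx, hvy]; simp
      have exa : vx = a ↔ R x p := by
        rw [← h2 x p hx hSp, hvx, ha]; simp
      have eyb : vy = b ↔ R y n := by
        rw [← h2 y n hy hSn, hvy, hb]; simp
      have exb : vx = b ↔ R x n := by
        rw [← h2 x n hx hSn, hvx, hb]; simp
      have eya : vy = a ↔ R y p := by
        rw [← h2 y p hy hSp, hvy, ha]; simp
      unfold pvJoin
      rw [exy, exa, eyb, exb, eya]
    · intro x v hv
      rw [hget x] at hv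
      cases hvx : label.get? x with
      | none => rw [hvx] at hv; simp at hv
      | some vx =>
        rw [hvx] at hv
        simp only [Option.map_some, Option.some.injEq] at hv
        by_cases hva : vx = a
        · rw [if_pos hva] at hv
          exact hv ▸ h3 n b hb
        · rw [if_neg hva] at hv
          exact hv ▸ h3 x vx hvx

lemma pvCells_pairwise_done {h w : Int} {done todo : List (Int × Int)} {p : Int × Int}
    (hsplit : pvB_cells h w = done ++ p :: todo) :
    p ∉ done ∧ (∀ q ∈ done, pvCellLt q p) ∧ (∀ q ∈ todo, pvCellLt p q) := by
  have hnd := pvCells_nodup h w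
  have hpw := pvCells_pairwise h w
  rw [hsplit] at hnd hpw
  rw [List.pairwise_append] at hpw
  obtain ⟨hp1, hp2, hp3⟩ := hpw
  refine ⟨?_, fun q hq => hp3 q hq p (List.mem_cons_self ..), (List.pairwise_cons.mp hp2).1⟩
  intro hmem
  exact (List.disjoint_of_nodup_append hnd) hmem (List.mem_cons_self ..)


lemma pvOkb_of_okC {g : List (List Int)} {bg h w : Int} {p : Int × Int}
    (hok : pvOkC g bg h w p) : pvOkb g bg p = true := by
  obtain ⟨-, -, -, -, v, hv, hne⟩ := hok
  unfold pvOkb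
  rw [hv]
  simpa using hne

lemma pvOkC_of_okb {g : List (List Int)} {bg h w : Int} {p : Int × Int}
    (hb : 0 ≤ p.1 ∧ p.1 < h ∧ 0 ≤ p.2 ∧ p.2 < w) (hok : pvOkb g bg p = true) :
    pvOkC g bg h w p := by
  unfold pvOkb at hok
  cases hg : pvGet2 g p.1 p.2 with
  | none => rw [hg] at hok; simp at hok
  | some x =>
    rw [hg] at hok
    exact ⟨hb.1, hb.2.1, hb.2.2.1, hb.2.2.2, x, hg, by simpa using hok⟩

lemma pvOkC_mem_cells {g : List (List Int)} {bg h w : Int} {p : Int × Int}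
    (hok : pvOkC g bg h w p) : p ∈ pvB_cells h w :=
  pvMem_cells.mpr ⟨hok.1, hok.2.1, hok.2.2.1, hok.2.2.2.1⟩

lemma pvAdj_done {g : List (List Int)} {bg h w : Int} {done todo : List (Int × Int)}
    {p q : Int × Int} (hsplit : pvB_cells h w = done ++ p :: todo)
    (hadj : pvAdj g bg h w p q) (hq : q ∈ done) :
    q = (p.1 - 1, p.2) ∨ q = (p.1, p.2 - 1) := by
  obtain ⟨-, hlt, -⟩ := pvCells_pairwise_done hsplit
  have hql := hlt q hq
  obtain ⟨-, -, hd⟩ := hadj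
  unfold pvCellLt at hql
  rcases hd with h' | h' | h' | h'
  · exact Or.inl h'
  · exfalso
    have e1 : q.1 = p.1 + 1 := by rw [h']
    have e2 : q.2 = p.2 := by rw [h']
    omega
  · exact Or.inr h'
  · exfalso
    have e1 : q.1 = p.1 := by rw [h']
    have e2 : q.2 = p.2 + 1 := by rw [h']
    omega

lemma pvNbr_mem_done {g : List (List Int)} {bg h w : Int} {done todo : List (Int × Int)}
    {p : Int × Int} (hsplit : pvB_cells h w = done ++ p :: todo) {n : Int × Int}
    (hokn : pvOkC g bg h w n) (hn : n = (p.1 - 1, p.2) ∨ n = (p.1, p.2 - 1)) :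
    n ∈ done := by
  obtain ⟨hpd, hlt, hgt⟩ := pvCells_pairwise_done hsplit
  have hmem : n ∈ pvB_cells h w := pvOkC_mem_cells hokn
  rw [hsplit] at hmem
  rcases List.mem_append.mp hmem with hmem | hmem
  · exact hmem
  · rcases List.mem_cons.mp hmem with heq | hmem
    · exfalso
      rw [Prod.ext_iff] at heq
      obtain ⟨h1, h2⟩ := heq
      rcases hn with rfl | rfl <;> dsimp only at h1 h2 <;> omega
    · exfalso
      have hlt2 := hgt n hmem
      unfold pvCellLt at hlt2
      rcases hn with rfl | rfl
      · rcases hlt2 with t | ⟨t1, t2⟩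
        · dsimp only at t; omega
        · dsimp only at t1; omega
      · rcases hlt2 with t | ⟨t1, t2⟩
        · dsimp only at t; omega
        · dsimp only at t2; omega

lemma pvEdgeStep_sem {g : List (List Int)} {bg h w : Int}
    {label : PySem.Dict (Int × Int) (Int × Int)} {S : Int × Int → Prop}
    {R : Int × Int → Int × Int → Prop} (hlab : pvLab label S R)
    {p : Int × Int} (hSp : S p) {n : Int × Int} (hnb : n.1 < h ∧ n.2 < w)
    (hSn : pvOkC g bg h w n → S n) :
    (pvOkC g bg h w n → pvLab (pvB_edgeStep g bg p label n) S (pvJoin R p n)) ∧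
    (¬ pvOkC g bg h w n → pvB_edgeStep g bg p label n = label) := by
  constructor
  · intro hok
    obtain ⟨o1, o2, o3, o4, v, hv, hne⟩ := hok
    have hne' : v ≠ bg := hne
    have hstep : pvB_edgeStep g bg p label n =
        (match label.get? p, label.get? n with
         | some a, some b => if a ≠ b then pvRelabel label a b else label
         | _, _ => label) := by
      unfold pvB_edgeStep
      rw [if_pos ⟨o1, o3⟩, hv]
      dsimp only
      rw [if_pos hne']
    rw [hstep]
    exact pvLab_edge hlab hSp (hSn ⟨o1, o2, o3, o4, v, hv, hne⟩)
  · intro hnok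
    unfold pvB_edgeStep
    by_cases hc : 0 ≤ n.1 ∧ 0 ≤ n.2
    · rw [if_pos hc]
      cases hg : pvGet2 g n.1 n.2 with
      | none => rfl
      | some x =>
        by_cases hx : x ≠ bg
        · exact absurd ⟨hc.1, hnb.1, hc.2, hnb.2, x, hg, hx⟩ hnok
        · simp only [if_neg hx]
    · rw [if_neg hc]

lemma pvJoin_congr {R R' : Int × Int → Int × Int → Prop} (h : ∀ u v, R u v ↔ R' u v)
    (p n x y : Int × Int) : pvJoin R p n x y ↔ pvJoin R' p n x y := by
  unfold pvJoin
  rw [h x y, h x p, h y n, h x n, h y p]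

lemma pvJoin_step {g : List (List Int)} {bg h w : Int} {done : List (Int × Int)}
    {p : Int × Int} (hpd : p ∉ done) (n : Int × Int) (cls : Int × Int → Prop)
    (hcp : cls p) (x y : Int × Int) :
    pvJoin (fun u v => pvConnOn g bg h w done u v ∨ (cls u ∧ cls v)) p n x y ↔
      (pvConnOn g bg h w done x y ∨
        ((cls x ∨ pvConnOn g bg h w done x n) ∧ (cls y ∨ pvConnOn g bg h w done y n))) := by
  have hFp : ∀ z, (pvConnOn g bg h w done z p ∨ (cls z ∧ cls p)) ↔ cls z := by
    intro z
    constructor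
    · rintro (hr | ⟨hz, -⟩)
      · rw [(pvConnOn_notmem_right hpd).mp hr]; exact hcp
      · exact hz
    · intro hz; exact Or.inr ⟨hz, hcp⟩
  constructor
  · rintro (hf | ⟨hfxp, hfyn⟩ | ⟨hfxn, hfyp⟩)
    · rcases hf with hr | ⟨hcx, hcy⟩
      · exact Or.inl hr
      · exact Or.inr ⟨Or.inl hcx, Or.inl hcy⟩
    · have hcx : cls x := (hFp x).mp hfxp
      rcases hfyn with hr | ⟨hcy, -⟩
      · exact Or.inr ⟨Or.inl hcx, Or.inr hr⟩
      · exact Or.inr ⟨Or.inl hcx, Or.inl hcy⟩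
    · have hcy : cls y := (hFp y).mp hfyp
      rcases hfxn with hr | ⟨hcx, -⟩
      · exact Or.inr ⟨Or.inr hr, Or.inl hcy⟩
      · exact Or.inr ⟨Or.inl hcx, Or.inl hcy⟩
  · rintro (hr | ⟨hx', hy'⟩)
    · exact Or.inl (Or.inl hr)
    · rcases hx' with hcx | hCx <;> rcases hy' with hcy | hCy
      · exact Or.inl (Or.inr ⟨hcx, hcy⟩)
      · exact Or.inr (Or.inl ⟨(hFp x).mpr hcx, Or.inl hCy⟩)
      · exact Or.inr (Or.inr ⟨Or.inl hCx, (hFp y).mpr hcy⟩)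
      · exact Or.inl (Or.inl (pvConnOn_trans hCx (pvConnOn_symm hCy)))

lemma pvCls_char {g : List (List Int)} {bg h w : Int} {done todo : List (Int × Int)}
    {p : Int × Int} (hsplit : pvB_cells h w = done ++ p :: todo)
    (hok : pvOkC g bg h w p) (z : Int × Int) :
    pvCls g bg h w done p z ↔
      z = p ∨ (pvOkC g bg h w (p.1 - 1, p.2) ∧ pvConnOn g bg h w done z (p.1 - 1, p.2))
            ∨ (pvOkC g bg h w (p.1, p.2 - 1) ∧ pvConnOn g bg h w done z (p.1, p.2 - 1)) := by
  unfold pvCls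
  constructor
  · rintro (rfl | ⟨n, hadj, hnd, hc⟩)
    · exact Or.inl rfl
    · rcases pvAdj_done hsplit hadj hnd with heq | heq
      · exact Or.inr (Or.inl ⟨heq ▸ hadj.2.1, heq ▸ hc⟩)
      · exact Or.inr (Or.inr ⟨heq ▸ hadj.2.1, heq ▸ hc⟩)
  · rintro (rfl | ⟨hokn, hc⟩ | ⟨hokn, hc⟩)
    · exact Or.inl rfl
    · exact Or.inr ⟨(p.1 - 1, p.2), ⟨hok, hokn, Or.inl rfl⟩,
        pvNbr_mem_done hsplit hokn (Or.inl rfl), hc⟩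
    · exact Or.inr ⟨(p.1, p.2 - 1), ⟨hok, hokn, Or.inr (Or.inr (Or.inl rfl))⟩,
        pvNbr_mem_done hsplit hokn (Or.inr rfl), hc⟩

theorem pvLabel_inv (g : List (List Int)) (bg h w : Int) :
    ∀ (todo done : List (Int × Int)) (label : PySem.Dict (Int × Int) (Int × Int)),
      pvB_cells h w = done ++ todo →
      pvLab label (fun x => x ∈ done ∧ pvOkb g bg x = true) (pvConnOn g bg h w done) →
      pvLab (todo.foldl (pvB_cellStep g bg) label)
        (fun x => x ∈ pvB_cells h w ∧ pvOkb g bg x = true)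
        (pvConnOn g bg h w (pvB_cells h w)) := by
  intro todo
  induction todo with
  | nil =>
    intro done label hsplit hlab
    rw [List.foldl_nil, List.append_nil] at *
    rw [hsplit]
    exact hlab
  | cons p todo ih =>
    intro done label hsplit hlab
    rw [List.foldl_cons]
    have hsplit' : pvB_cells h w = (done ++ [p]) ++ todo := by
      rw [hsplit]; simp
    obtain ⟨hpd, hltq, hgtq⟩ := pvCells_pairwise_done hsplit
    have hpc : p ∈ pvB_cells h w := by
      rw [hsplit]; exact List.mem_append_right _ (List.mem_cons_self ..)
    have hpb := pvMem_cells.mp hpc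
    apply ih (done ++ [p]) _ hsplit'
    -- goal: pvLab (pvB_cellStep g bg label p) (S (done ++ [p])) (ConnOn (done ++ [p]))
    have hnotok_case : pvOkb g bg p = false →
        pvLab label (fun x => x ∈ done ++ [p] ∧ pvOkb g bg x = true)
          (pvConnOn g bg h w (done ++ [p])) := by
      intro hokb
      have hnok : ¬ pvOkC g bg h w p := by
        intro hk; rw [pvOkb_of_okC hk] at hokb; simp at hokb
      refine pvLab_congr hlab ?_ ?_
      · intro x
        constructor
        · rintro ⟨hm, hokz⟩; exact ⟨List.mem_append_left _ hm, hokz⟩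
        · rintro ⟨hm, hokz⟩
          rcases List.mem_append.mp hm with hm | hm
          · exact ⟨hm, hokz⟩
          · rw [List.mem_singleton.mp hm] at hokz
            rw [hokb] at hokz
            simp at hokz
      · intro x y _ _
        exact (pvConnOn_snoc_notok hnok).symm
    unfold pvB_cellStep
    cases hg : pvGet2 g p.1 p.2 with
    | none =>
      exact hnotok_case (by unfold pvOkb; rw [hg])
    | some x0 =>
      dsimp only
      by_cases hx0 : x0 = bg
      · rw [if_pos hx0]
        refine hnotok_case ?_
        unfold pvOkb
        rw [hg]
        simp [hx0]
      · rw [if_neg hx0]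
        -- p is an object cell: insert then the two neighbour merges
        have hokb : pvOkb g bg p = true := by unfold pvOkb; rw [hg]; simpa using hx0
        have hokp : pvOkC g bg h w p := pvOkC_of_okb hpb hokb
        have hRends : ∀ x y, pvConnOn g bg h w done x y →
            x = y ∨ ((x ∈ done ∧ pvOkb g bg x = true) ∧ (y ∈ done ∧ pvOkb g bg y = true)) := by
          intro x y hc
          rcases pvConnOn_ends hc with rfl | ⟨⟨hx1, hx2⟩, ⟨hy1, hy2⟩⟩
          · exact Or.inl rfl
          · exact Or.inr ⟨⟨hx1, pvOkb_of_okC hx2⟩, ⟨hy1, pvOkb_of_okC hy2⟩⟩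
        have hSp_false : ¬ (p ∈ done ∧ pvOkb g bg p = true) := fun hs => hpd hs.1
        have hlab1 := pvLab_insert hlab hRends hSp_false
        -- the two neighbours
        have hb1 : (p.1 - 1, p.2).1 < h ∧ (p.1 - 1, p.2).2 < w := by
          constructor <;> simp <;> omega
        have hb2 : (p.1, p.2 - 1).1 < h ∧ (p.1, p.2 - 1).2 < w := by
          constructor <;> simp <;> omega
        have hS1p : (p ∈ done ∧ pvOkb g bg p = true) ∨ p = p := Or.inr rfl
        have hS1n1 : pvOkC g bg h w (p.1 - 1, p.2) →
            ((p.1 - 1, p.2) ∈ done ∧ pvOkb g bg (p.1 - 1, p.2) = true) ∨ (p.1 - 1, p.2) = p :=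
          fun hk => Or.inl ⟨pvNbr_mem_done hsplit hk (Or.inl rfl), pvOkb_of_okC hk⟩
        have hS1n2 : pvOkC g bg h w (p.1, p.2 - 1) →
            ((p.1, p.2 - 1) ∈ done ∧ pvOkb g bg (p.1, p.2 - 1) = true) ∨ (p.1, p.2 - 1) = p :=
          fun hk => Or.inl ⟨pvNbr_mem_done hsplit hk (Or.inr rfl), pvOkb_of_okC hk⟩
        have hSiff : ∀ z : Int × Int,
            ((z ∈ done ∧ pvOkb g bg z = true) ∨ z = p)
              ↔ (z ∈ done ++ [p] ∧ pvOkb g bg z = true) := by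
          intro z
          constructor
          · rintro (⟨hm, hokz⟩ | rfl)
            · exact ⟨List.mem_append_left _ hm, hokz⟩
            · exact ⟨List.mem_append_right _ (by simp), hokb⟩
          · rintro ⟨hm, hokz⟩
            rcases List.mem_append.mp hm with hm | hm
            · exact Or.inl ⟨hm, hokz⟩
            · exact Or.inr (List.mem_singleton.mp hm)
        -- process neighbour 1 then neighbour 2, tracking the class predicate
        have hstep1 := pvEdgeStep_sem (n := (p.1 - 1, p.2)) hlab1 hS1p hb1 hS1n1
        by_cases hok1 : pvOkC g bg h w (p.1 - 1, p.2) <;>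
          [(have hlab2 := hstep1.1 hok1); (have hlab2 := (hstep1.2 hok1) ▸ hlab1)]
        case pos =>
          -- relation after step 1 is Join R1 p n1; as R0 ∨ cls1 ∧ cls1 with cls1 z = (z=p ∨ C z n1)
          have hR2 : ∀ x y, pvJoin (fun u v => pvConnOn g bg h w done u v ∨ (u = p ∧ v = p))
              p (p.1 - 1, p.2) x y ↔
              (pvConnOn g bg h w done x y ∨
                ((x = p ∨ pvConnOn g bg h w done x (p.1 - 1, p.2)) ∧
                 (y = p ∨ pvConnOn g bg h w done y (p.1 - 1, p.2)))) := by
            intro x y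
            have := pvJoin_step (g := g) (bg := bg) (h := h) (w := w) hpd (p.1 - 1, p.2)
              (fun z => z = p) rfl x y
            refine Iff.trans ?_ this
            exact pvJoin_congr (fun u v => Iff.rfl) p (p.1 - 1, p.2) x y
          have hstep2 := pvEdgeStep_sem (n := (p.1, p.2 - 1)) hlab2 hS1p hb2 hS1n2
          by_cases hok2 : pvOkC g bg h w (p.1, p.2 - 1) <;>
            [(have hlab3 := hstep2.1 hok2); (have hlab3 := (hstep2.2 hok2) ▸ hlab2)]
          case pos =>
            refine pvLab_congr hlab3 hSiff ?_
            intro x y _ _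
            have hR3 := pvJoin_step (g := g) (bg := bg) (h := h) (w := w) hpd (p.1, p.2 - 1)
              (fun z => z = p ∨ pvConnOn g bg h w done z (p.1 - 1, p.2)) (Or.inl rfl) x y
            refine Iff.trans (Iff.trans (pvJoin_congr hR2 p (p.1, p.2 - 1) x y) hR3) ?_
            rw [pvConnOn_snoc hpd hokp x y]
            have hcx := pvCls_char hsplit hokp x
            have hcy := pvCls_char hsplit hokp y
            constructor
            · rintro (hr | ⟨hx', hy'⟩)
              · exact Or.inl hr
              · refine Or.inr ⟨hcx.mpr ?_, hcy.mpr ?_⟩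
                · rcases hx' with (rfl | hc) | hc
                  · exact Or.inl rfl
                  · exact Or.inr (Or.inl ⟨hok1, hc⟩)
                  · exact Or.inr (Or.inr ⟨hok2, hc⟩)
                · rcases hy' with (rfl | hc) | hc
                  · exact Or.inl rfl
                  · exact Or.inr (Or.inl ⟨hok1, hc⟩)
                  · exact Or.inr (Or.inr ⟨hok2, hc⟩)
            · rintro (hr | ⟨hx', hy'⟩)
              · exact Or.inl hr
              · refine Or.inr ⟨?_, ?_⟩
                · rcases hcx.mp hx' with rfl | ⟨-, hc⟩ | ⟨-, hc⟩
                  · exact Or.inl (Or.inl rfl)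
                  · exact Or.inl (Or.inr hc)
                  · exact Or.inr hc
                · rcases hcy.mp hy' with rfl | ⟨-, hc⟩ | ⟨-, hc⟩
                  · exact Or.inl (Or.inl rfl)
                  · exact Or.inl (Or.inr hc)
                  · exact Or.inr hc
          case neg =>
            refine pvLab_congr hlab3 hSiff ?_
            intro x y _ _
            refine Iff.trans (hR2 x y) ?_
            rw [pvConnOn_snoc hpd hokp x y]
            have hcx := pvCls_char hsplit hokp x
            have hcy := pvCls_char hsplit hokp y
            constructor
            · rintro (hr | ⟨hx', hy'⟩)
              · exact Or.inl hr
              · refine Or.inr ⟨hcx.mpr ?_, hcy.mpr ?_⟩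
                · rcases hx' with rfl | hc
                  · exact Or.inl rfl
                  · exact Or.inr (Or.inl ⟨hok1, hc⟩)
                · rcases hy' with rfl | hc
                  · exact Or.inl rfl
                  · exact Or.inr (Or.inl ⟨hok1, hc⟩)
            · rintro (hr | ⟨hx', hy'⟩)
              · exact Or.inl hr
              · refine Or.inr ⟨?_, ?_⟩
                · rcases hcx.mp hx' with rfl | ⟨-, hc⟩ | ⟨hk, -⟩
                  · exact Or.inl rfl
                  · exact Or.inr hc
                  · exact absurd hk hok2
                · rcases hcy.mp hy' with rfl | ⟨-, hc⟩ | ⟨hk, -⟩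
                  · exact Or.inl rfl
                  · exact Or.inr hc
                  · exact absurd hk hok2
        case neg =>
          have hstep2 := pvEdgeStep_sem (n := (p.1, p.2 - 1)) hlab2 hS1p hb2 hS1n2
          by_cases hok2 : pvOkC g bg h w (p.1, p.2 - 1) <;>
            [(have hlab3 := hstep2.1 hok2); (have hlab3 := (hstep2.2 hok2) ▸ hlab2)]
          case pos =>
            refine pvLab_congr hlab3 hSiff ?_
            intro x y _ _
            have hR3 := pvJoin_step (g := g) (bg := bg) (h := h) (w := w) hpd (p.1, p.2 - 1)
              (fun z => z = p) rfl x y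
            refine Iff.trans (Iff.trans (pvJoin_congr (fun u v => Iff.rfl) p (p.1, p.2 - 1) x y) hR3) ?_
            rw [pvConnOn_snoc hpd hokp x y]
            have hcx := pvCls_char hsplit hokp x
            have hcy := pvCls_char hsplit hokp y
            constructor
            · rintro (hr | ⟨hx', hy'⟩)
              · exact Or.inl hr
              · refine Or.inr ⟨hcx.mpr ?_, hcy.mpr ?_⟩
                · rcases hx' with rfl | hc
                  · exact Or.inl rfl
                  · exact Or.inr (Or.inr ⟨hok2, hc⟩)
                · rcases hy' with rfl | hc
                  · exact Or.inl rfl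
                  · exact Or.inr (Or.inr ⟨hok2, hc⟩)
            · rintro (hr | ⟨hx', hy'⟩)
              · exact Or.inl hr
              · refine Or.inr ⟨?_, ?_⟩
                · rcases hcx.mp hx' with rfl | ⟨hk, -⟩ | ⟨-, hc⟩
                  · exact Or.inl rfl
                  · exact absurd hk hok1
                  · exact Or.inr hc
                · rcases hcy.mp hy' with rfl | ⟨hk, -⟩ | ⟨-, hc⟩
                  · exact Or.inl rfl
                  · exact absurd hk hok1
                  · exact Or.inr hc
          case neg =>
            refine pvLab_congr hlab3 hSiff ?_
            intro x y _ _
            rw [pvConnOn_snoc hpd hokp x y]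
            have hcx := pvCls_char hsplit hokp x
            have hcy := pvCls_char hsplit hokp y
            constructor
            · rintro (hr | ⟨rfl, rfl⟩)
              · exact Or.inl hr
              · exact Or.inr ⟨hcx.mpr (Or.inl rfl), hcy.mpr (Or.inl rfl)⟩
            · rintro (hr | ⟨hx', hy'⟩)
              · exact Or.inl hr
              · refine Or.inr ⟨?_, ?_⟩
                · rcases hcx.mp hx' with rfl | ⟨hk, -⟩ | ⟨hk, -⟩
                  · exact rfl
                  · exact absurd hk hok1
                  · exact absurd hk hok2
                · rcases hcy.mp hy' with rfl | ⟨hk, -⟩ | ⟨hk, -⟩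
                  · exact rfl
                  · exact absurd hk hok1
                  · exact absurd hk hok2

lemma pvConnOn_cells {g : List (List Int)} {bg h w : Int} {x y : Int × Int} :
    pvConnOn g bg h w (pvB_cells h w) x y ↔ pvComp g bg h w x y := by
  constructor
  · intro hc
    induction hc with
    | refl => exact Relation.ReflTransGen.refl
    | tail _ hs ih => exact Relation.ReflTransGen.tail ih hs.1
  · intro hc
    induction hc with
    | refl => exact Relation.ReflTransGen.refl
    | tail _ hadj ih =>
      exact Relation.ReflTransGen.tail ih
        ⟨hadj, pvOkC_mem_cells hadj.1, pvOkC_mem_cells hadj.2.1⟩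

-- ===== phase 1: the final label dict classifies exactly by connectivity =====
theorem pvLabel_main (g : List (List Int)) (bg h w : Int) :
    (∀ p, ((pvB_label g bg h w).get? p).isSome = true ↔ pvOkC g bg h w p) ∧
    (∀ p q, pvOkC g bg h w p → pvOkC g bg h w q →
      ((pvB_label g bg h w).get? p = (pvB_label g bg h w).get? q ↔ pvComp g bg h w p q)) := by
  have hfold : pvB_label g bg h w = (pvB_cells h w).foldl (pvB_cellStep g bg) PySem.Dict.empty :=
    pvFoldl_foldl_product (pvB_cellStep g bg) _ _ _
  have hempty : pvLab PySem.Dict.empty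
      (fun x => x ∈ ([] : List (Int × Int)) ∧ pvOkb g bg x = true) (pvConnOn g bg h w []) := by
    refine ⟨PySem.Dict.nodup_keys_empty, ?_, ?_, ?_⟩
    · intro x; simp [PySem.Dict.get?_empty]
    · intro x y hx; simp at hx
    · intro x v hv; simp [PySem.Dict.get?_empty] at hv
  have hlab := pvLabel_inv g bg h w (pvB_cells h w) [] PySem.Dict.empty (by simp) hempty
  rw [hfold]
  obtain ⟨-, h1, h2, h3⟩ := hlab
  constructor
  · intro p
    rw [h1 p]
    show p ∈ pvB_cells h w ∧ pvOkb g bg p = true ↔ _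
    rw [← List.mem_filter]
    exact pvOkC_iff_mem_filter.symm
  · intro p q hp hq
    rw [h2 p q ⟨pvOkC_mem_cells hp, pvOkb_of_okC hp⟩ ⟨pvOkC_mem_cells hq, pvOkb_of_okC hq⟩,
      pvConnOn_cells]

-- ===== phase 2: grouping by label =====
theorem pvGroups_values (g : List (List Int)) (bg h w : Int)
    (label : PySem.Dict (Int × Int) (Int × Int)) :
    (pvB_groups g bg h w label).values =
      (PySem.Set.ofList (((pvB_cells h w).filter (pvOkb g bg)).map (fun p => label.getD p p))).map
        (fun ρ => ((pvB_cells h w).filter (pvOkb g bg)).filter (fun p => label.getD p p == ρ)) := by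
  have hfold : pvB_groups g bg h w label
      = (pvB_cells h w).foldl (fun d (p : Int × Int) =>
          match pvGet2 g p.1 p.2 with
          | some x => if x ≠ bg then d.modify (label.getD p p) [] (· ++ [p]) else d
          | none => d) PySem.Dict.empty := by
    unfold pvB_groups pvB_cells
    exact pvFoldl_foldl_product
      (fun (d : PySem.Dict (Int × Int) (List (Int × Int))) (p : Int × Int) =>
        match pvGet2 g p.1 p.2 with
        | some x => if x ≠ bg then d.modify (label.getD p p) [] (· ++ [p]) else d
        | none => d) _ _ _
  have hstepeq : ∀ (d : PySem.Dict (Int × Int) (List (Int × Int))) (p : Int × Int),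
      (match pvGet2 g p.1 p.2 with
       | some x => if x ≠ bg then d.modify (label.getD p p) [] (· ++ [p]) else d
       | none => d)
        = if pvOkb g bg p then d.modify (label.getD p p) [] (· ++ [p]) else d := by
    intro d p
    unfold pvOkb
    cases hg : pvGet2 g p.1 p.2 with
    | none => simp
    | some x => by_cases hx : x = bg <;> simp [hx]
  rw [hfold]
  simp only [hstepeq]
  rw [PySem.List.foldl_if_eq_foldl_filter (pvOkb g bg) _ (pvB_cells h w) PySem.Dict.empty]
  have hnkeys : (((pvB_cells h w).filter (pvOkb g bg)).foldl
      (fun d p => d.modify (label.getD p p) [] (· ++ [p])) PySem.Dict.empty).keys.Nodup :=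
    PySem.Dict.nodup_keys_foldl_modify_key _ (fun p => label.getD p p) []
      (fun _ x => (· ++ [x])) PySem.Dict.empty PySem.Dict.nodup_keys_empty
  rw [PySem.Dict.values_eq_map_keys _ hnkeys []]
  have hkeys : (((pvB_cells h w).filter (pvOkb g bg)).foldl
      (fun d p => d.modify (label.getD p p) [] (· ++ [p])) PySem.Dict.empty).keys
      = PySem.Set.ofList (((pvB_cells h w).filter (pvOkb g bg)).map (fun p => label.getD p p)) := by
    rw [PySem.Dict.keys_foldl_modify_key _ (fun p => label.getD p p) []
      (fun _ x => (· ++ [x])) PySem.Dict.empty]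
    rfl
  rw [hkeys]
  refine List.map_congr_left ?_
  intro ρ hρ
  have hconv : ((pvB_cells h w).filter (pvOkb g bg)).foldl
      (fun d p => d.modify (label.getD p p) [] (· ++ [p])) PySem.Dict.empty
      = ((((pvB_cells h w).filter (pvOkb g bg)).map (fun p => (label.getD p p, p))).foldl
          (fun d q => d.modify q.1 [] (· ++ [q.2])) PySem.Dict.empty) := by
    rw [List.foldl_map]
  rw [hconv, PySem.Dict.getD_foldl_modify_append, List.filter_map, List.map_map]
  have hid : ((fun (x : (Int × Int) × (Int × Int)) => x.2)
      ∘ fun (p : Int × Int) => (label.getD p p, p)) = id := by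
    funext p; rfl
  simp only [hid, List.map_id]
  simp

-- one A-object vs one label value
def pvRC (g : List (List Int)) (bg h w : Int) (label : PySem.Dict (Int × Int) (Int × Int))
    (obj : List (Int × Int × Int)) (ρ : Int × Int) : Prop :=
  (pvProj obj).Nodup ∧
  ∀ x, x ∈ pvProj obj ↔ (pvOkC g bg h w x ∧ label.getD x x = ρ)

-- ===== A's scan produces the classes in first-occurrence order =====
theorem pvA_scan_main (g : List (List Int)) (bg h w : Int)
    (label : PySem.Dict (Int × Int) (Int × Int))
    (H1 : ∀ p, (label.get? p).isSome = true ↔ pvOkC g bg h w p)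
    (H2 : ∀ p q, pvOkC g bg h w p → pvOkC g bg h w q →
      (label.get? p = label.get? q ↔ pvComp g bg h w p q)) :
    ∀ (todo done : List (Int × Int)) vis objs,
      pvB_cells h w = done ++ todo →
      pvDims vis h w →
      (∀ x, pvVisT vis x ↔ ∃ q ∈ done.filter (pvOkb g bg), pvComp g bg h w q x) →
      List.Forall₂ (pvRC g bg h w label) objs
        (PySem.Set.ofList ((done.filter (pvOkb g bg)).map (fun p => label.getD p p))) →
      List.Forall₂ (pvRC g bg h w label) (todo.foldl (pvA_cellstep g bg h w) (vis, objs)).2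
        (PySem.Set.ofList (((done ++ todo).filter (pvOkb g bg)).map (fun p => label.getD p p))) := by
  have H2' : ∀ p q, pvOkC g bg h w p → pvOkC g bg h w q →
      (label.getD p p = label.getD q q ↔ pvComp g bg h w p q) := by
    intro p q hp hq
    obtain ⟨vp, hvp⟩ := Option.isSome_iff_exists.mp ((H1 p).mpr hp)
    obtain ⟨vq, hvq⟩ := Option.isSome_iff_exists.mp ((H1 q).mpr hq)
    rw [PySem.Dict.getD_eq_get?_getD, PySem.Dict.getD_eq_get?_getD, hvp, hvq,
      ← H2 p q hp hq, hvp, hvq]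
    simp
  intro todo
  induction todo with
  | nil =>
    intro done vis objs hsplit hdims hvis hF
    rw [List.foldl_nil]
    simpa using hF
  | cons p todo ih =>
    intro done vis objs hsplit hdims hvis hF
    rw [List.foldl_cons]
    have hsplit' : pvB_cells h w = (done ++ [p]) ++ todo := by rw [hsplit]; simp
    have hpc : p ∈ pvB_cells h w := by
      rw [hsplit]; exact List.mem_append_right _ (List.mem_cons_self ..)
    have hpb := pvMem_cells.mp hpc
    rw [show done ++ p :: todo = (done ++ [p]) ++ todo by simp]
    obtain ⟨b, hb⟩ := pvGet2_some_of_dims hdims ⟨hpb.1, hpb.2.1, hpb.2.2.1, hpb.2.2.2⟩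
    cases b with
    | true =>
      have hvisp : pvVisT vis p := ⟨hpb.1, hpb.2.2.1, hb⟩
      have hstep : pvA_cellstep g bg h w (vis, objs) p = (vis, objs) := by
        unfold pvA_cellstep
        rw [hb]
      rw [hstep]
      obtain ⟨q, hqmem, hqcomp⟩ := (hvis p).mp hvisp
      have hqok : pvOkC g bg h w q := by
        have h1 := List.mem_filter.mp hqmem
        exact pvOkC_of_okb
          (pvMem_cells.mp (by rw [hsplit]; exact List.mem_append_left _ h1.1)) h1.2
      have hokp : pvOkC g bg h w p := pvComp_ok hqok hqcomp
      have hokbp : pvOkb g bg p = true := pvOkb_of_okC hokp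
      have hfilter : (done ++ [p]).filter (pvOkb g bg)
          = done.filter (pvOkb g bg) ++ [p] := by
        rw [List.filter_append]
        simp [hokbp]
      have hroot_mem : label.getD p p
          ∈ (done.filter (pvOkb g bg)).map (fun r => label.getD r r) :=
        List.mem_map.mpr ⟨q, hqmem, (H2' q p hqok hokp).mpr hqcomp⟩
      have hroots : PySem.Set.ofList
            (((done ++ [p]).filter (pvOkb g bg)).map (fun r => label.getD r r))
          = PySem.Set.ofList ((done.filter (pvOkb g bg)).map (fun r => label.getD r r)) := by
        rw [hfilter, List.map_append]
        rw [show (([p]).map (fun r => label.getD r r)) = [label.getD p p] by simp]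
        rw [PySem.Set.ofList_append_singleton]
        exact PySem.Set.add_of_mem (by rw [PySem.Set.mem_ofList]; exact hroot_mem)
      have hvis' : ∀ x, pvVisT vis x ↔
          ∃ r ∈ (done ++ [p]).filter (pvOkb g bg), pvComp g bg h w r x := by
        intro x
        rw [hvis x]
        constructor
        · rintro ⟨r, hr, hc⟩
          exact ⟨r, by rw [hfilter]; exact List.mem_append_left _ hr, hc⟩
        · rintro ⟨r, hr, hc⟩
          rw [hfilter] at hr
          rcases List.mem_append.mp hr with hr | hr
          · exact ⟨r, hr, hc⟩
          · rw [List.mem_singleton.mp hr] at hc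
            exact ⟨q, hqmem, Relation.ReflTransGen.trans hqcomp hc⟩
      exact ih (done ++ [p]) vis objs hsplit' hdims hvis' (hroots ▸ hF)
    | false =>
      have hnvisp : ¬ pvVisT vis p := by
        rintro ⟨-, -, hvv⟩
        rw [hb] at hvv
        simp at hvv
      by_cases hokbp : pvOkb g bg p = true
      · -- fresh object cell: run the DFS
        have hokp : pvOkC g bg h w p :=
          pvOkC_of_okb ⟨hpb.1, hpb.2.1, hpb.2.2.1, hpb.2.2.2⟩ hokbp
        obtain ⟨-, -, -, -, x0, hx0, hx0ne⟩ := hokp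
        have hokp : pvOkC g bg h w p :=
          pvOkC_of_okb ⟨hpb.1, hpb.2.1, hpb.2.2.1, hpb.2.2.2⟩ hokbp
        have hstep : pvA_cellstep g bg h w (vis, objs) p =
            ((pvA_dfs g bg h w (pvSet2 vis p.1 p.2 true) [(p.1, p.2)] []).1,
             objs ++ [(pvA_dfs g bg h w (pvSet2 vis p.1 p.2 true) [(p.1, p.2)] []).2]) := by
          unfold pvA_cellstep
          rw [hb, hx0]
          dsimp only
          rw [if_pos hx0ne]
        rw [hstep]
        have hcl : ∀ a, (∃ r ∈ done.filter (pvOkb g bg), pvComp g bg h w r a) →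
            ∀ q', pvAdj g bg h w a q' →
              (∃ r ∈ done.filter (pvOkb g bg), pvComp g bg h w r q') := by
          rintro a ⟨r, hr, hc⟩ q' hadj
          exact ⟨r, hr, pvComp_tail hc hadj⟩
        have hnv : ¬ (∃ r ∈ done.filter (pvOkb g bg), pvComp g bg h w r p) :=
          fun hv => hnvisp ((hvis p).mpr hv)
        obtain ⟨d1, d2, d3, d4, d5, d6⟩ :=
          pvA_dfs_main g bg h w (fun x => ∃ r ∈ done.filter (pvOkb g bg), pvComp g bg h w r x)
            p hcl hokp (pvSet2 vis p.1 p.2 true) [(p.1, p.2)] []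
            (pvSet2_dims hdims _ _ _)
            (by
              intro y
              rw [pvVisT_set hb hpb.1 hpb.2.2.1 y, hvis y]
              simp [pvProj]
              exact or_comm)
            (by simp [pvProj])
            (by
              intro y hy
              simp [pvProj] at hy
              rw [hy]
              exact hnv)
            (by
              intro y hy
              simp [pvProj] at hy
              rw [hy]
              exact Relation.ReflTransGen.refl)
            (by simp [pvProj])
            (by simp [pvProj])
        set st := pvA_dfs g bg h w (pvSet2 vis p.1 p.2 true) [(p.1, p.2)] [] with hst
        have hseedin : p ∈ pvProj st.2 := by
          have := d6 (p.1, p.2) (by simp [pvProj])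
          exact this
        have hCA := pvCells_eq_comp g bg h w
          (fun x => ∃ r ∈ done.filter (pvOkb g bg), pvComp g bg h w r x) p (pvProj st.2)
          hcl hseedin d4 d5
        have hpair : pvRC g bg h w label st.2 (label.getD p p) := by
          refine ⟨d3, fun x => ?_⟩
          rw [hCA x]
          constructor
          · intro hc
            exact ⟨pvComp_ok hokp hc, ((H2' p x hokp (pvComp_ok hokp hc)).mpr hc).symm⟩
          · rintro ⟨hxok, hroot⟩
            exact (H2' p x hokp hxok).mp hroot.symm
        have hfilter : (done ++ [p]).filter (pvOkb g bg)
            = done.filter (pvOkb g bg) ++ [p] := by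
          rw [List.filter_append]
          simp [hokbp]
        have hfresh : label.getD p p
            ∉ (done.filter (pvOkb g bg)).map (fun r => label.getD r r) := by
          intro hmem
          obtain ⟨r, hr, hre⟩ := List.mem_map.mp hmem
          have hrok : pvOkC g bg h w r := by
            have h1 := List.mem_filter.mp hr
            exact pvOkC_of_okb
              (pvMem_cells.mp (by rw [hsplit]; exact List.mem_append_left _ h1.1)) h1.2
          exact hnv ⟨r, hr, (H2' r p hrok hokp).mp hre⟩
        have hroots : PySem.Set.ofList
              (((done ++ [p]).filter (pvOkb g bg)).map (fun r => label.getD r r))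
            = PySem.Set.ofList ((done.filter (pvOkb g bg)).map (fun r => label.getD r r))
              ++ [label.getD p p] := by
          rw [hfilter, List.map_append]
          rw [show (([p]).map (fun r => label.getD r r)) = [label.getD p p] by simp]
          rw [PySem.Set.ofList_append_singleton]
          exact PySem.Set.add_of_not_mem
            (by rw [PySem.Set.mem_ofList]; exact hfresh)
        have hvis'new : ∀ x, pvVisT st.1 x ↔
            ∃ r ∈ (done ++ [p]).filter (pvOkb g bg), pvComp g bg h w r x := by
          intro x
          rw [d2 x, hCA x, hfilter]
          constructor
          · rintro (⟨r, hr, hc⟩ | hc)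
            · exact ⟨r, List.mem_append_left _ hr, hc⟩
            · exact ⟨p, List.mem_append_right _ (by simp), hc⟩
          · rintro ⟨r, hr, hc⟩
            rcases List.mem_append.mp hr with hr | hr
            · exact Or.inl ⟨r, hr, hc⟩
            · rw [List.mem_singleton.mp hr] at hc
              exact Or.inr hc
        have hF' := pvForall₂_append_one hF hpair
        rw [← hroots] at hF'
        exact ih (done ++ [p]) st.1 (objs ++ [st.2]) hsplit' d1 hvis'new hF'
      · -- background (or out-of-row) cell: skip
        have hstep : pvA_cellstep g bg h w (vis, objs) p = (vis, objs) := by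
          unfold pvA_cellstep
          rw [hb]
          cases hgg : pvGet2 g p.1 p.2 with
          | none => rfl
          | some x1 =>
            dsimp only
            rw [if_neg ?_]
            intro hne
            exact hokbp (by unfold pvOkb; rw [hgg]; simpa using hne)
        rw [hstep]
        have hokbp' : pvOkb g bg p = false := by
          cases hx : pvOkb g bg p
          · rfl
          · exact absurd hx hokbp
        have hfilter : (done ++ [p]).filter (pvOkb g bg) = done.filter (pvOkb g bg) := by
          rw [List.filter_append]
          simp [hokbp']
        have hvis' : ∀ x, pvVisT vis x ↔
            ∃ r ∈ (done ++ [p]).filter (pvOkb g bg), pvComp g bg h w r x := by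
          intro x
          rw [hvis x, hfilter]
        exact ih (done ++ [p]) vis objs hsplit' hdims hvis' (by rw [hfilter]; exact hF)

-- ===== background value =====
lemma pvInsertBy_map {α β : Type} (m : α → β) (bf : β → β → Bool) (x : α) (l : List α) :
    PySem.List.insertBy bf (m x) (l.map m)
      = (PySem.List.insertBy (fun a b => bf (m a) (m b)) x l).map m := by
  induction l with
  | nil => simp [PySem.List.insertBy]
  | cons y ys ih =>
    simp only [List.map_cons, PySem.List.insertBy]
    by_cases hb : bf (m x) (m y)
    · rw [if_pos hb, if_pos hb]; rfl
    · rw [if_neg hb, if_neg hb]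
      simp [ih]

lemma pvFoldl_insertBy_map_aux {α β : Type} (m : α → β) (bf : β → β → Bool) (xs : List α) :
    ∀ (acc : List α),
      (xs.map m).foldl (fun acc x => PySem.List.insertBy bf x acc) (acc.map m)
        = (xs.foldl (fun acc x => PySem.List.insertBy (fun a b => bf (m a) (m b)) x acc) acc).map m := by
  induction xs with
  | nil => intro acc; simp
  | cons x xs ih =>
    intro acc
    rw [List.map_cons, List.foldl_cons, List.foldl_cons, pvInsertBy_map m bf x acc]
    exact ih _

lemma pvSorted_rev_map {α β : Type} (m : α → β) (f : β → Int) (xs : List α) :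
    PySem.List.sorted (xs.map m) f true = (PySem.List.sorted xs (fun a => f (m a)) true).map m := by
  rw [PySem.List.sorted_rev_eq_foldl_insertBy, PySem.List.sorted_rev_eq_foldl_insertBy]
  simpa using pvFoldl_insertBy_map_aux m (fun a b => decide (f b < f a)) xs []

lemma pvInsertBy_rev_head {α : Type} (f : α → Int) (x : α) (acc : List α) :
    (PySem.List.insertBy (fun a b => decide (f b < f a)) x acc).head?
      = match acc.head? with
        | none => some x
        | some mm => if f mm < f x then some x else some mm := by
  cases acc with
  | nil => simp [PySem.List.insertBy]
  | cons y ys =>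
    simp only [PySem.List.insertBy, List.head?_cons]
    by_cases hb : f y < f x
    · rw [if_pos (by simpa using hb)]; simp [hb]
    · rw [if_neg (by simpa using hb)]; simp [hb]

lemma pvFoldl_insertBy_head_max {α : Type} (f : α → Int) (xs : List α) :
    ∀ (acc : List α) (macc : Option α), acc.head? = macc →
      (xs.foldl (fun acc x => PySem.List.insertBy (fun a b => decide (f b < f a)) x acc) acc).head?
        = xs.foldl (fun acc x =>
            match acc with
            | none => some x
            | some mm => if f mm < f x then some x else some mm) macc := by
  induction xs with
  | nil => intro acc macc hm; simpa using hm
  | cons x xs ih =>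
    intro acc macc hm
    rw [List.foldl_cons, List.foldl_cons]
    refine ih _ _ ?_
    rw [pvInsertBy_rev_head, hm]

lemma pvB_counts_keys_nodup (g : List (List Int)) : (pvB_counts g).keys.Nodup := by
  unfold pvB_counts
  have : ∀ (rows : List (List Int)) (d : PySem.Dict Int Int), d.keys.Nodup →
      (rows.foldl (fun d row => row.foldl (fun d v => d.insert v (d.getD v 0 + 1)) d) d).keys.Nodup := by
    intro rows
    induction rows with
    | nil => intro d hd; exact hd
    | cons row rows ih =>
      intro d hd
      exact ih _ (PySem.Dict.nodup_keys_foldl_insert row (fun d x => d.getD x 0 + 1) d hd)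
  exact this g PySem.Dict.empty PySem.Dict.nodup_keys_empty

lemma pvBg_eq (g : List (List Int)) : pvA_bg? g = pvB_bg? g := by
  have hcnt : pvA_counter g = pvB_counts g := rfl
  unfold pvA_bg? pvB_bg?
  rw [hcnt]
  set d := pvB_counts g with hd
  have hnd : d.keys.Nodup := pvB_counts_keys_nodup g
  rw [PySem.Dict.items_eq_map_keys d hnd 0]
  rw [pvSorted_rev_map (fun k => (k, d.getD k 0)) (fun p => p.2) d.keys]
  rw [PySem.List.pyGet?_zero, ← List.head?_eq_getElem?]
  rw [List.head?_map]
  have hmax : (PySem.List.sorted d.keys (fun a => d.getD a 0) true).head?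
      = PySem.List.max? d.keys (fun k => d.getD k 0) := by
    rw [PySem.List.sorted_rev_eq_foldl_insertBy]
    exact pvFoldl_insertBy_head_max (fun a => d.getD a 0) d.keys [] none rfl
  rw [hmax]
  cases PySem.List.max? d.keys (fun k => d.getD k 0) with
  | none => simp
  | some m => simp

-- ===== stable sort transfers pointwise relations =====
lemma pvInsertBy_forall₂ {α β κ : Type} [LT κ] [DecidableLT κ] {R : α → β → Prop} (k1 : α → κ) (k2 : β → κ)
    (hk : ∀ a b, R a b → k1 a = k2 b) {x : α} {y : β} (hxy : R x y) :
    ∀ {acc : List α} {acc' : List β}, List.Forall₂ R acc acc' →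
      List.Forall₂ R (PySem.List.insertBy (fun a b => decide (k1 a < k1 b)) x acc)
        (PySem.List.insertBy (fun a b => decide (k2 a < k2 b)) y acc') := by
  intro acc acc' hacc
  induction hacc with
  | nil => simpa [PySem.List.insertBy] using hxy
  | @cons a b t t' hab htt ih =>
    simp only [PySem.List.insertBy]
    have hxk : k1 x = k2 y := hk x y hxy
    have hak : k1 a = k2 b := hk a b hab
    by_cases hlt : k1 x < k1 a
    · have hlt2 : k2 y < k2 b := by rw [← hxk, ← hak]; exact hlt
      rw [if_pos (by simpa using hlt), if_pos (by simpa using hlt2)]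
      exact List.Forall₂.cons hxy (List.Forall₂.cons hab htt)
    · have hlt2 : ¬ k2 y < k2 b := by rw [← hxk, ← hak]; exact hlt
      rw [if_neg (by simpa using hlt), if_neg (by simpa using hlt2)]
      exact List.Forall₂.cons hab ih

lemma pvSorted_forall₂ {α β κ : Type} [LT κ] [DecidableLT κ] {R : α → β → Prop} (k1 : α → κ) (k2 : β → κ)
    (hk : ∀ a b, R a b → k1 a = k2 b) {xs : List α} {ys : List β}
    (hxy : List.Forall₂ R xs ys) :
    List.Forall₂ R (PySem.List.sorted xs k1 false) (PySem.List.sorted ys k2 false) := by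
  rw [PySem.List.sorted_eq_foldl_insertBy, PySem.List.sorted_eq_foldl_insertBy]
  have : ∀ (accA : List α) (accB : List β), List.Forall₂ R accA accB →
      List.Forall₂ R
        (xs.foldl (fun acc x => PySem.List.insertBy (fun a b => decide (k1 a < k1 b)) x acc) accA)
        (ys.foldl (fun acc y => PySem.List.insertBy (fun a b => decide (k2 a < k2 b)) y acc) accB) := by
    induction hxy with
    | nil => intro accA accB h; exact h
    | @cons x y t t' hab htt ih =>
      intro accA accB h
      rw [List.foldl_cons, List.foldl_cons]
      exact ih _ _ (pvInsertBy_forall₂ k1 k2 hk hab h)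
  exact this [] [] List.Forall₂.nil

lemma pvForall₂_zipIdx {α β : Type} {R : α → β → Prop} :
    ∀ {l1 : List α} {l2 : List β}, List.Forall₂ R l1 l2 → ∀ (k : Nat),
      List.Forall₂ (fun a b => R a.1 b.1 ∧ a.2 = b.2) (l1.zipIdx k) (l2.zipIdx k) := by
  intro l1 l2 h
  induction h with
  | nil => intro k; simp
  | @cons x y t t' hab htt ih =>
    intro k
    rw [List.zipIdx_cons, List.zipIdx_cons]
    exact List.Forall₂.cons ⟨hab, rfl⟩ (ih (k + 1))

-- ===== painting =====
def pvColAt (L : List (List (Int × Int) × Nat)) (bg : Int) (p : Int × Int) : Option Int :=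
  L.foldl (fun acc ci => if p ∈ ci.1 then some (pvA_colOf ci.2 bg) else acc) none

lemma pvColAt_append (L : List (List (Int × Int) × Nat)) (ci : List (Int × Int) × Nat)
    (bg : Int) (p : Int × Int) :
    pvColAt (L ++ [ci]) bg p
      = if p ∈ ci.1 then some (pvA_colOf ci.2 bg) else pvColAt L bg p := by
  unfold pvColAt
  rw [List.foldl_append]
  rfl

lemma pvColAt_congr (bg : Int) :
    ∀ {LA LB : List (List (Int × Int) × Nat)},
      List.Forall₂ (fun a b => (∀ x, x ∈ a.1 ↔ x ∈ b.1) ∧ a.2 = b.2) LA LB →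
      ∀ p, pvColAt LA bg p = pvColAt LB bg p := by
  have gen : ∀ {LA LB : List (List (Int × Int) × Nat)},
      List.Forall₂ (fun a b => (∀ x, x ∈ a.1 ↔ x ∈ b.1) ∧ a.2 = b.2) LA LB →
      ∀ p (acc : Option Int),
        LA.foldl (fun acc ci => if p ∈ ci.1 then some (pvA_colOf ci.2 bg) else acc) acc
          = LB.foldl (fun acc ci => if p ∈ ci.1 then some (pvA_colOf ci.2 bg) else acc) acc := by
    intro LA LB h
    induction h with
    | nil => intro p acc; rfl
    | @cons a b t t' hab htt ih =>
      intro p acc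
      rw [List.foldl_cons, List.foldl_cons]
      have : (if p ∈ a.1 then some (pvA_colOf a.2 bg) else acc)
          = (if p ∈ b.1 then some (pvA_colOf b.2 bg) else acc) := by
        rw [hab.2]
        by_cases hm : p ∈ a.1
        · rw [if_pos hm, if_pos ((hab.1 p).mp hm)]
        · rw [if_neg hm, if_neg (fun hc => hm ((hab.1 p).mpr hc))]
      rw [this]
      exact ih p _
  intro LA LB h p
  exact gen h p none

-- ===== shape preservation of 2-d writes =====
lemma pvSet2_length {α : Type} (m : List (List α)) (r c : Int) (v : α) :
    (pvSet2 m r c v).length = m.length := by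
  unfold pvSet2
  cases PySem.List.pyGet? m r <;> simp

lemma pvSet2_rowlen {α : Type} (m : List (List α)) (r c : Int) (v : α) (hr : 0 ≤ r)
    (n : Nat) : ((pvSet2 m r c v)[n]?).map List.length = (m[n]?).map List.length := by
  unfold pvSet2
  cases hrow : PySem.List.pyGet? m r with
  | none => rfl
  | some row =>
    rw [PySem.List.pyGet?_of_nonneg _ hr] at hrow
    rw [List.getElem?_set]
    by_cases hn : r.toNat = n
    · subst hn
      rw [if_pos rfl, if_pos (List.getElem?_eq_some_iff.mp hrow).1, hrow]
      simp
    · rw [if_neg hn]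

lemma pvGet2_isSome_pvSet2 {α : Type} (m : List (List α)) (r c : Int) (v : α)
    (hr : 0 ≤ r) {x y : Int} (hx : 0 ≤ x) :
    (pvGet2 (pvSet2 m r c v) x y).isSome = (pvGet2 m x y).isSome := by
  have hlen := pvSet2_rowlen m r c v hr x.toNat
  unfold pvGet2
  rw [PySem.List.pyGet?_of_nonneg _ hx, PySem.List.pyGet?_of_nonneg _ hx]
  cases h1 : m[x.toNat]? with
  | none =>
    rw [h1] at hlen
    cases h2 : (pvSet2 m r c v)[x.toNat]? with
    | none => simp
    | some row' => rw [h2] at hlen; simp at hlen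
  | some row =>
    rw [h1] at hlen
    cases h2 : (pvSet2 m r c v)[x.toNat]? with
    | none => rw [h2] at hlen; simp at hlen
    | some row' =>
      rw [h2] at hlen
      simp only [Option.map_some, Option.some.injEq] at hlen
      rw [Option.bind_some, Option.bind_some]
      cases h3 : PySem.List.pyGet? row' y with
      | none =>
        rw [PySem.List.pyGet?_eq_none_iff] at h3
        rw [hlen] at h3
        rw [← PySem.List.pyGet?_eq_none_iff] at h3
        rw [h3]
      | some a =>
        have h4 : ¬ PySem.List.pyGet? row y = none := by
          rw [PySem.List.pyGet?_eq_none_iff, ← hlen, ← PySem.List.pyGet?_eq_none_iff, h3]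
          simp
        cases h5 : PySem.List.pyGet? row y with
        | none => exact absurd h5 h4
        | some b => rfl

lemma pvColOf_eq : @pvB_colOf = @pvA_colOf := rfl

lemma pvWrite_obj (col : Int) :
    ∀ (obj : List (Int × Int × Int)) (res : List (List Int)),
      (∀ t ∈ obj, 0 ≤ t.1 ∧ 0 ≤ t.2.1 ∧ (pvGet2 res t.1 t.2.1).isSome = true) →
      (∀ x y : Int, 0 ≤ x → 0 ≤ y →
        pvGet2 (obj.foldl (fun res t => pvSet2 res t.1 t.2.1 col) res) x y
          = if (x, y) ∈ pvProj obj then some col else pvGet2 res x y) ∧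
      ((obj.foldl (fun res t => pvSet2 res t.1 t.2.1 col) res).length = res.length) ∧
      (∀ n : Nat, ((obj.foldl (fun res t => pvSet2 res t.1 t.2.1 col) res)[n]?).map List.length
        = (res[n]?).map List.length) ∧
      (∀ x y : Int, 0 ≤ x → 0 ≤ y →
        (pvGet2 (obj.foldl (fun res t => pvSet2 res t.1 t.2.1 col) res) x y).isSome
          = (pvGet2 res x y).isSome) := by
  intro obj
  induction obj with
  | nil =>
    intro res hval
    exact ⟨fun x y hx hy => by simp [pvProj], rfl, fun n => rfl, fun x y hx hy => rfl⟩
  | cons t rest ih =>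
    intro res hval
    obtain ⟨ht1, ht2, ht3⟩ := hval t (List.mem_cons_self ..)
    obtain ⟨b₀, hb₀⟩ := Option.isSome_iff_exists.mp ht3
    have hval1 : ∀ t' ∈ rest, 0 ≤ t'.1 ∧ 0 ≤ t'.2.1 ∧
        (pvGet2 (pvSet2 res t.1 t.2.1 col) t'.1 t'.2.1).isSome = true := by
      intro t' ht'
      obtain ⟨a1, a2, a3⟩ := hval t' (List.mem_cons_of_mem _ ht')
      exact ⟨a1, a2, by rw [pvGet2_isSome_pvSet2 res t.1 t.2.1 col ht1 a1]; exact a3⟩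
    obtain ⟨ihv, ihl, ihr, ihs⟩ := ih (pvSet2 res t.1 t.2.1 col) hval1
    rw [List.foldl_cons]
    refine ⟨?_, ?_, ?_, ?_⟩
    · intro x y hx hy
      rw [ihv x y hx hy]
      by_cases hm : (x, y) ∈ pvProj rest
      · rw [if_pos hm, if_pos (by simp [pvProj] at hm ⊢; tauto)]
      · rw [if_neg hm]
        rw [pvGet2_pvSet2 hb₀ ht1 ht2 col hx hy]
        by_cases he : x = t.1 ∧ y = t.2.1
        · rw [if_pos he, if_pos ?_]
          simp only [pvProj, List.map_cons, List.mem_cons]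
          exact Or.inl (by rw [he.1, he.2])
        · rw [if_neg he, if_neg ?_]
          simp only [pvProj, List.map_cons, List.mem_cons]
          rintro (hc | hc)
          · exact he ⟨congrArg Prod.fst hc, congrArg Prod.snd hc⟩
          · exact hm (by simpa [pvProj] using hc)
    · rw [ihl, pvSet2_length]
    · intro n; rw [ihr n, pvSet2_rowlen _ _ _ _ ht1 n]
    · intro x y hx hy
      rw [ihs x y hx hy, pvGet2_isSome_pvSet2 res t.1 t.2.1 col ht1 hx]

lemma pvWrite_outer (bg : Int) (L : List (List (Int × Int × Int) × Nat)) :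
    ∀ (res : List (List Int)),
      (∀ ci ∈ L, ∀ t ∈ ci.1, 0 ≤ t.1 ∧ 0 ≤ t.2.1 ∧ (pvGet2 res t.1 t.2.1).isSome = true) →
      (∀ x y : Int, 0 ≤ x → 0 ≤ y →
        pvGet2 (L.foldl (fun res ci =>
            ci.1.foldl (fun res t => pvSet2 res t.1 t.2.1 (pvA_colOf ci.2 bg)) res) res) x y
          = match pvColAt (L.map (fun ci => (pvProj ci.1, ci.2))) bg (x, y) with
            | some c => some c
            | none => pvGet2 res x y) ∧
      ((L.foldl (fun res ci =>
          ci.1.foldl (fun res t => pvSet2 res t.1 t.2.1 (pvA_colOf ci.2 bg)) res) res).length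
        = res.length) ∧
      (∀ n : Nat, ((L.foldl (fun res ci =>
          ci.1.foldl (fun res t => pvSet2 res t.1 t.2.1 (pvA_colOf ci.2 bg)) res) res)[n]?).map
            List.length = (res[n]?).map List.length) ∧
      (∀ x y : Int, 0 ≤ x → 0 ≤ y →
        (pvGet2 (L.foldl (fun res ci =>
            ci.1.foldl (fun res t => pvSet2 res t.1 t.2.1 (pvA_colOf ci.2 bg)) res) res) x y).isSome
          = (pvGet2 res x y).isSome) := by
  induction L using List.reverseRecOn with
  | nil =>
    intro res hval
    exact ⟨fun x y hx hy => by simp [pvColAt], rfl, fun n => rfl, fun x y hx hy => rfl⟩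
  | append_singleton L ci ihL =>
    intro res hval
    have hvalL : ∀ ci2 ∈ L, ∀ t ∈ ci2.1, 0 ≤ t.1 ∧ 0 ≤ t.2.1 ∧
        (pvGet2 res t.1 t.2.1).isSome = true :=
      fun ci2 hci2 => hval ci2 (List.mem_append_left _ hci2)
    obtain ⟨ihv, ihl, ihr, ihs⟩ := ihL res hvalL
    rw [List.foldl_append]
    have hvalci : ∀ t ∈ ci.1, 0 ≤ t.1 ∧ 0 ≤ t.2.1 ∧
        (pvGet2 (L.foldl (fun res ci =>
          ci.1.foldl (fun res t => pvSet2 res t.1 t.2.1 (pvA_colOf ci.2 bg)) res) res)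
            t.1 t.2.1).isSome = true := by
      intro t ht
      obtain ⟨a1, a2, a3⟩ := hval ci (List.mem_append_right _ (List.mem_singleton.mpr rfl)) t ht
      exact ⟨a1, a2, by rw [ihs t.1 t.2.1 a1 a2]; exact a3⟩
    obtain ⟨wv, wl, wr, ws⟩ := pvWrite_obj (pvA_colOf ci.2 bg) ci.1 _ hvalci
    rw [List.foldl_cons, List.foldl_nil]
    refine ⟨?_, by rw [wl, ihl], fun n => by rw [wr n, ihr n], ?_⟩
    · intro x y hx hy
      rw [wv x y hx hy, List.map_append, List.map_cons, List.map_nil, pvColAt_append]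
      dsimp only
      by_cases hm : (x, y) ∈ pvProj ci.1
      · rw [if_pos hm, if_pos hm]
      · rw [if_neg hm, if_neg hm, ihv x y hx hy]
    · intro x y hx hy
      rw [ws x y hx hy, ihs x y hx hy]

lemma pvDict_comp (col : Int) (comp : List (Int × Int)) :
    ∀ (d : PySem.Dict (Int × Int) Int) (p : Int × Int),
      (comp.foldl (fun d cell => d.insert cell col) d).get? p
        = if p ∈ comp then some col else d.get? p := by
  induction comp using List.reverseRecOn with
  | nil => intro d p; simp
  | append_singleton comp cell ih =>
    intro d p
    rw [List.foldl_append, List.foldl_cons, List.foldl_nil]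
    rw [PySem.Dict.get?_insert]
    by_cases he : p = cell
    · rw [if_pos he, if_pos (by simp [he])]
    · rw [if_neg he, ih d p]
      by_cases hm : p ∈ comp
      · rw [if_pos hm, if_pos (by simp [hm])]
      · rw [if_neg hm, if_neg (by simp [he, hm])]

lemma pvDict_outer (bg : Int) (L : List (List (Int × Int) × Nat)) :
    ∀ (d : PySem.Dict (Int × Int) Int) (p : Int × Int),
      (L.foldl (fun d ci => ci.1.foldl (fun d cell => d.insert cell (pvB_colOf ci.2 bg)) d) d).get? p
        = match pvColAt L bg p with
          | some c => some c
          | none => d.get? p := by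
  induction L using List.reverseRecOn with
  | nil => intro d p; simp [pvColAt]
  | append_singleton L ci ih =>
    intro d p
    rw [List.foldl_append, List.foldl_cons, List.foldl_nil, pvColAt_append]
    rw [pvDict_comp (pvB_colOf ci.2 bg) ci.1 _ p]
    by_cases hm : p ∈ ci.1
    · rw [if_pos hm, if_pos hm, pvColOf_eq]
    · rw [if_neg hm, if_neg hm, ih d p]

lemma pvForall₂_mem_left {α β : Type} {R : α → β → Prop} :
    ∀ {l1 : List α} {l2 : List β}, List.Forall₂ R l1 l2 → ∀ x ∈ l1, ∃ y ∈ l2, R x y := by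
  intro l1 l2 h
  induction h with
  | nil => intro x hx; simp at hx
  | @cons a b t t' hab htt ih =>
    intro x hx
    rcases List.mem_cons.mp hx with rfl | hx
    · exact ⟨b, List.mem_cons_self .., hab⟩
    · obtain ⟨y, hy, hxy⟩ := ih x hx
      exact ⟨y, List.mem_cons_of_mem _ hy, hxy⟩

lemma pvGet2_natCast {α : Type} (m : List (List α)) (r c : Nat) (hr : r < m.length)
    (hc : c < m[r].length) : pvGet2 m (r : Int) (c : Int) = some m[r][c] := by
  unfold pvGet2
  rw [PySem.List.pyGet?_natCast, List.getElem?_eq_getElem hr, Option.bind_some,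
    PySem.List.pyGet?_natCast, List.getElem?_eq_getElem hc]

-- combines the phase lemmas: A's object list matches B's grouped components
theorem pvObjs_match (g : List (List Int)) (bg : Int) (row0 : List Int)
    (hg0 : PySem.List.pyGet? g 0 = some row0) :
    List.Forall₂ (pvR g bg (g.length : Int) (row0.length : Int))
      (pvA_scan g bg (g.length : Int) (row0.length : Int)
        (List.replicate g.length (List.replicate row0.length false))).2
      ((pvB_groups g bg (g.length : Int) (row0.length : Int)
        (pvB_label g bg (g.length : Int) (row0.length : Int))).values) := by
  obtain ⟨H1, H2⟩ := pvLabel_main g bg (g.length : Int) (row0.length : Int)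
  have hdims0 : pvDims (List.replicate g.length (List.replicate row0.length false))
      (g.length : Int) (row0.length : Int) := by
    refine ⟨by positivity, by positivity, by simp, ?_⟩
    intro row hrow
    rw [List.eq_of_mem_replicate hrow]
    simp
  have hvis0 : ∀ x, pvVisT (List.replicate g.length (List.replicate row0.length false)) x ↔
      ∃ q ∈ (([] : List (Int × Int)).filter (pvOkb g bg)),
        pvComp g bg (g.length : Int) (row0.length : Int) q x := by
    intro x
    simp only [List.filter_nil]
    constructor
    · rintro ⟨h1, h2, h3⟩
      exfalso
      obtain ⟨row, hrow', hcell⟩ := Option.bind_eq_some_iff.mp h3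
      have hre : row = List.replicate row0.length false :=
        List.eq_of_mem_replicate (PySem.List.mem_of_pyGet?_eq_some _ hrow')
      subst hre
      have := PySem.List.mem_of_pyGet?_eq_some _ hcell
      simpa using List.eq_of_mem_replicate this
    · rintro ⟨q, hq, -⟩
      simp at hq
  have hA := pvA_scan_main g bg (g.length : Int) (row0.length : Int)
    (pvB_label g bg (g.length : Int) (row0.length : Int)) H1 H2
    (pvB_cells (g.length : Int) (row0.length : Int)) []
    (List.replicate g.length (List.replicate row0.length false)) []
    (by simp) hdims0 hvis0 (by simp)
  rw [pvA_scan_eq_foldl]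
  rw [pvGroups_values g bg (g.length : Int) (row0.length : Int)
    (pvB_label g bg (g.length : Int) (row0.length : Int))]
  simp only [List.nil_append] at hA
  rw [List.forall₂_map_right_iff]
  refine List.Forall₂.imp ?_ hA
  intro obj ρ hrc
  obtain ⟨hnd, hiff⟩ := hrc
  refine ⟨hnd, List.Nodup.filter _ (List.Nodup.filter _
    (pvCells_nodup (g.length : Int) (row0.length : Int))), ?_, ?_⟩
  · intro x
    rw [hiff x, List.mem_filter]
    rw [pvOkC_iff_mem_filter]
    simp
  · intro x hx
    exact pvOkC_iff_mem_filter.mpr (List.mem_filter.mp hx).1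

theorem pvMain (g : List (List Int)) :
    recolor_each_obj_by_size g = recolor_each_obj_by_size_alt g := by
  unfold recolor_each_obj_by_size recolor_each_obj_by_size_alt
  rw [pvBg_eq g]
  cases hbg : pvB_bg? g with
  | none => rfl
  | some bg =>
  cases hg0 : PySem.List.pyGet? g 0 with
  | none => rfl
  | some row0 =>
  dsimp only
  have hF := pvObjs_match g bg row0 hg0
  have hk : ∀ o c, pvR g bg (g.length : Int) (row0.length : Int) o c → o.length = c.length := by
    intro o c hR
    obtain ⟨hnd1, hnd2, hiff, -⟩ := hR
    have hperm : (pvProj o).Perm c := (List.perm_ext_iff_of_nodup hnd1 hnd2).mpr hiff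
    have := hperm.length_eq
    simpa [pvProj] using this
  have hFs := pvSorted_forall₂ (fun o => o.length) (fun c => c.length) hk hF
  have hFz := pvForall₂_zipIdx hFs 0
  have hres0 : g.map (fun row => PySem.List.slice row none none) = g := by
    simp [PySem.List.slice_none_none]
  rw [hres0]
  set sortedA := PySem.List.sorted (pvA_scan g bg (g.length : Int) (row0.length : Int)
    (List.replicate g.length (List.replicate row0.length false))).2 (fun o => o.length) false
    with hsA
  set sortedB := PySem.List.sorted ((pvB_groups g bg (g.length : Int) (row0.length : Int)
    (pvB_label g bg (g.length : Int) (row0.length : Int))).values)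
    (fun c => c.length) false with hsB
  have hval : ∀ ci ∈ sortedA.zipIdx, ∀ t ∈ ci.1,
      0 ≤ t.1 ∧ 0 ≤ t.2.1 ∧ (pvGet2 g t.1 t.2.1).isSome = true := by
    intro ci hci t ht
    have hmemA : ci.1 ∈ sortedA := by
      obtain ⟨-, h2⟩ := (List.mem_zipIdx hci).2
      exact h2 ▸ List.getElem_mem _
    rw [hsA, PySem.List.mem_sorted] at hmemA
    obtain ⟨c, hc, hR⟩ := pvForall₂_mem_left hF ci.1 hmemA
    have hcell : (t.1, t.2.1) ∈ pvProj ci.1 := by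
      simp only [pvProj, List.mem_map]
      exact ⟨t, ht, rfl⟩
    have hok := hR.2.2.2 _ ((hR.2.2.1 _).mp hcell)
    obtain ⟨o1, o2, o3, o4, v, hv, -⟩ := hok
    exact ⟨o1, o3, by rw [hv]; rfl⟩
  obtain ⟨wv, wl, wr, -⟩ := pvWrite_outer bg sortedA.zipIdx g hval
  have hcolor := pvDict_outer bg sortedB.zipIdx PySem.Dict.empty
  have hFz2 : List.Forall₂ (fun a b => (∀ x, x ∈ a.1 ↔ x ∈ b.1) ∧ a.2 = b.2)
      (sortedA.zipIdx.map (fun ci => (pvProj ci.1, ci.2))) sortedB.zipIdx := by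
    rw [List.forall₂_map_left_iff]
    exact List.Forall₂.imp (fun a b hab => ⟨hab.1.2.2.1, hab.2⟩) hFz
  have hcong := pvColAt_congr bg hFz2
  apply List.ext_getElem
  · rw [wl]; simp
  · intro r hLr hRr
    have hgr : r < g.length := by rw [wl] at hLr; exact hLr
    have hrows : ∀ n : Nat, ((sortedA.zipIdx.foldl (fun res oi =>
        oi.1.foldl (fun res t => pvSet2 res t.1 t.2.1 (pvA_colOf oi.2 bg)) res) g)[n]?).map
          List.length = (g[n]?).map List.length := wr
    have hrowlen : (sortedA.zipIdx.foldl (fun res oi =>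
        oi.1.foldl (fun res t => pvSet2 res t.1 t.2.1 (pvA_colOf oi.2 bg)) res) g)[r].length
          = g[r].length := by
      have := hrows r
      rw [List.getElem?_eq_getElem hLr, List.getElem?_eq_getElem hgr] at this
      simpa using this
    rw [List.getElem_map, List.getElem_zipIdx]
    apply List.ext_getElem
    · rw [hrowlen]; simp
    · intro c hLc hRc
      have hgc : c < g[r].length := by rw [hrowlen] at hLc; exact hLc
      rw [List.getElem_map, List.getElem_zipIdx]
      have hLv := pvGet2_natCast _ r c hLr hLc
      rw [wv (r : Int) (c : Int) (by positivity) (by positivity), hcong ((r : Int), (c : Int))] at hLv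
      rw [PySem.Dict.getD_eq_get?_getD, hcolor ((↑(0 + r) : Int), (↑(0 + c) : Int))]
      simp only [Nat.zero_add] at *
      have hgv := pvGet2_natCast g r c hgr hgc
      cases hcol : pvColAt sortedB.zipIdx bg ((r : Int), (c : Int)) with
      | some col =>
        rw [hcol] at hLv
        simp only [Option.some.injEq] at hLv
        simpa using hLv.symm
      | none =>
        rw [hcol] at hLv
        rw [hgv] at hLv
        simp only [Option.some.injEq] at hLv
        simpa using hLv.symm

-- ===== VERDICT (by name: the statement is the Claim_ definition above) =====
theorem recolor_each_obj_by_size_spec : Claim_equal_recolor_each_obj_by_size := by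
  intro g _hdom _hpre
  unfold Spec_recolor_each_obj_by_size
  exact pvMain g
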